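-- pv_equiv track=rewrite | github.com/inaciovasquez2020/chronos-urf-rr | scripts/generate_heawood_lifts.py | gauge_from_tree
-- ===== SOURCE A (Python) =====
-- from collections import deque
--
-- def base_projection_ball(base_adj, root_u, radius):
--     dist = {root_u: 0}
--     q = deque([root_u])
--     while q:
--         u = q.popleft()
--         if dist[u] == radius:
--             continue
--         for w in base_adj[u]:
--             if w not in dist:
--                 dist[w] = dist[u] + 1
--                 q.append(w)
--     return dist
--
-- def gauge_from_tree(base_adj, twisted_edge, root_u, radius):
--     ball = base_projection_ball(base_adj, root_u, radius)
--     parent = {root_u: None}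
--     q = deque([root_u])
--     while q:
--         u = q.popleft()
--         if ball[u] == radius:
--             continue
--         for w in base_adj[u]:
--             if w in ball and w not in parent:
--                 parent[w] = u
--                 q.append(w)
--     tau = {root_u: 0}
--     order = [root_u]
--     q = deque([root_u])
--     while q:
--         u = q.popleft()
--         for w in base_adj[u]:
--             if w in ball and parent.get(w) == u:
--                 e = tuple(sorted((u, w)))
--                 sigma = 1 if twisted_edge is not None and e == tuple(sorted(twisted_edge)) else 0
--                 tau[w] = tau[u] ^ sigma
--                 q.append(w)
--                 order.append(w)
--     return tau
-- ===== SOURCE B (Python) =====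
-- from collections import deque
--
-- def gauge_from_tree(base_adj, twisted_edge, root_u, radius):
--     # One BFS that maintains dist and tau together (A runs three BFS passes).
--     te = tuple(sorted(twisted_edge)) if twisted_edge is not None else None
--     dist = {root_u: 0}
--     tau = {root_u: 0}
--     q = deque([root_u])
--     while q:
--         u = q.popleft()
--         neighbors = base_adj[u]
--         if dist[u] == radius:
--             continue
--         for w in neighbors:
--             if w not in dist:
--                 dist[w] = dist[u] + 1
--                 sigma = 1 if te is not None and tuple(sorted((u, w))) == te else 0
--                 tau[w] = tau[u] ^ sigma
--                 q.append(w)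
--     return tau
-- ===== Notes on version B (the rewrite author's own statement) =====
-- stated objective: simpler
-- what changed: A runs three separate BFS passes (distance ball, parent tree, then XOR gauge propagated over the tree); B runs a single BFS from the root that maintains dist and tau simultaneously, computing each node's gauge at the moment it is discovered.
import Mathlib
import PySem

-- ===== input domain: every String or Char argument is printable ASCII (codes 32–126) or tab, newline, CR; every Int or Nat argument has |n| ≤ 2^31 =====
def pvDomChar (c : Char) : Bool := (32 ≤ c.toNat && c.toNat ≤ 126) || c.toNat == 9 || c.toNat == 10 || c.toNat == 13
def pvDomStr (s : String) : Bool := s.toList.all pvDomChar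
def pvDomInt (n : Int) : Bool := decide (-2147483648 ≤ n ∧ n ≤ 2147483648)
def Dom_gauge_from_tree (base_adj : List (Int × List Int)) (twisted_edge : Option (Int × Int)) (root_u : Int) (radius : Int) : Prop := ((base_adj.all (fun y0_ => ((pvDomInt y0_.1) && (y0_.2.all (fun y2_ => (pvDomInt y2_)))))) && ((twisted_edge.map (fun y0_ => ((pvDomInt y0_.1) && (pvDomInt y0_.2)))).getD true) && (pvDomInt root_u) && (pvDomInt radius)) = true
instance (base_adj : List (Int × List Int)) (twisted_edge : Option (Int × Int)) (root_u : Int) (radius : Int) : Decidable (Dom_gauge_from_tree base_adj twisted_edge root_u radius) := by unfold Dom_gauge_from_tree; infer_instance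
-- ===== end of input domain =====

-- B replaces A's three BFS passes (distance ball, parent tree, gauge over the tree) by ONE BFS
-- that maintains dist and tau together; same return value on the stated domain.

-- ===== PORT A =====

-- tuple(sorted((a, b))) on a 2-tuple — exact
def pySort2 (a b : Int) : Int × Int := if a ≤ b then (a, b) else (b, a)

-- fuel bound for the dedup-guarded while-loops (each queue pop consumes one unit; such a
-- loop pops at most 1 + Σ|adjacency list| times, so this bound is never reached)
def pvFuel (base_adj : List (Int × List Int)) : Nat := base_adj.foldl (fun a p => a + 2 + p.2.length) 2

-- fuel bound for A's third while-loop, which re-enqueues per neighbour OCCURRENCE (on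
-- repeated entries it re-visits subtrees); its pop count is bounded by this power
def pvFuel3 (base_adj : List (Int × List Int)) : Nat :=
  ((base_adj.flatMap (fun p => p.2)).length + 2) ^ ((base_adj.flatMap (fun p => p.2)).length + 2)

-- body of the inner `for w in base_adj[u]` of the first BFS (dist, queue as state)
def pvStep1 (u : Int) (s : PySem.Dict Int Int × List Int) (w : Int) : PySem.Dict Int Int × List Int :=
  if (s.1.get? w).isSome then s else (s.1.insert w (s.1.getD u 0 + 1), s.2 ++ [w])

-- `base_projection_ball`'s while-loop; dist[u] read as getD u 0 (u is always a key when popped)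
def pvBfs1 (adj : PySem.Dict Int (List Int)) (radius : Int) :
    Nat → PySem.Dict Int Int → List Int → PySem.Dict Int Int
  | 0, dist, _ => dist
  | _ + 1, dist, [] => dist
  | f + 1, dist, u :: q =>
    if dist.getD u 0 = radius then pvBfs1 adj radius f dist q
    else
      let s := (adj.getD u []).foldl (pvStep1 u) (dist, q)
      pvBfs1 adj radius f s.1 s.2

-- body of the inner loop of the parent-tree BFS
def pvStep2 (ball : PySem.Dict Int Int) (u : Int)
    (s : PySem.Dict Int (Option Int) × List Int) (w : Int) :
    PySem.Dict Int (Option Int) × List Int :=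
  if (ball.get? w).isSome && !(s.1.get? w).isSome then (s.1.insert w (some u), s.2 ++ [w]) else s

def pvBfs2 (adj : PySem.Dict Int (List Int)) (ball : PySem.Dict Int Int) (radius : Int) :
    Nat → PySem.Dict Int (Option Int) → List Int → PySem.Dict Int (Option Int)
  | 0, parent, _ => parent
  | _ + 1, parent, [] => parent
  | f + 1, parent, u :: q =>
    if ball.getD u 0 = radius then pvBfs2 adj ball radius f parent q
    else
      let s := (adj.getD u []).foldl (pvStep2 ball u) (parent, q)
      pvBfs2 adj ball radius f s.1 s.2

-- `sigma = 1 if twisted_edge is not None and e == tuple(sorted(twisted_edge)) else 0`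
def pvSigma (twisted_edge : Option (Int × Int)) (u w : Int) : Int :=
  match twisted_edge with
  | none => 0
  | some t => if pySort2 u w = pySort2 t.1 t.2 then 1 else 0

-- body of the inner loop of the gauge BFS; state (tau, q, order);
-- `parent.get(w) == u` is `parent.getD w none == some u`; `^` is PySem.Int.bxor
def pvStep3 (ball : PySem.Dict Int Int) (parent : PySem.Dict Int (Option Int))
    (twisted_edge : Option (Int × Int)) (u : Int)
    (s : PySem.Dict Int Int × List Int × List Int) (w : Int) :
    PySem.Dict Int Int × List Int × List Int :=
  if (ball.get? w).isSome && (parent.getD w none == some u) then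
    (s.1.insert w (PySem.Int.bxor (s.1.getD u 0) (pvSigma twisted_edge u w)),
     s.2.1 ++ [w], s.2.2 ++ [w])
  else s

def pvBfs3 (adj : PySem.Dict Int (List Int)) (ball : PySem.Dict Int Int)
    (parent : PySem.Dict Int (Option Int)) (twisted_edge : Option (Int × Int)) :
    Nat → PySem.Dict Int Int → List Int → List Int → PySem.Dict Int Int
  | 0, tau, _, _ => tau
  | _ + 1, tau, _, [] => tau
  | f + 1, tau, order, u :: q =>
    let s := (adj.getD u []).foldl (pvStep3 ball parent twisted_edge u) (tau, q, order)
    pvBfs3 adj ball parent twisted_edge f s.1 s.2.2 s.2.1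

def gauge_from_tree (base_adj : List (Int × List Int)) (twisted_edge : Option (Int × Int)) (root_u : Int) (radius : Int) : List (Int × Int) :=
  let adj := PySem.Dict.ofList base_adj
  let F := pvFuel base_adj
  let ball := pvBfs1 adj radius F (PySem.Dict.empty.insert root_u 0) [root_u]
  let parent := pvBfs2 adj ball radius F (PySem.Dict.empty.insert root_u none) [root_u]
  let tau := pvBfs3 adj ball parent twisted_edge (pvFuel3 base_adj) (PySem.Dict.empty.insert root_u 0) [root_u] [root_u]
  tau.items

-- ===== PORT B =====

-- `sigma = 1 if te is not None and tuple(sorted((u, w))) == te else 0`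
def pvSigT (te : Option (Int × Int)) (u w : Int) : Int :=
  match te with
  | none => 0
  | some e => if pySort2 u w = e then 1 else 0

-- body of B's single inner loop; state (dist, tau, q)
def pvStepB (te : Option (Int × Int)) (u : Int)
    (s : PySem.Dict Int Int × PySem.Dict Int Int × List Int) (w : Int) :
    PySem.Dict Int Int × PySem.Dict Int Int × List Int :=
  if (s.1.get? w).isSome then s
  else
    (s.1.insert w (s.1.getD u 0 + 1),
     s.2.1.insert w (PySem.Int.bxor (s.2.1.getD u 0) (pvSigT te u w)),
     s.2.2 ++ [w])

def pvBfsB (adj : PySem.Dict Int (List Int)) (te : Option (Int × Int)) (radius : Int) :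
    Nat → PySem.Dict Int Int → PySem.Dict Int Int → List Int → PySem.Dict Int Int
  | 0, _, tau, _ => tau
  | _ + 1, _, tau, [] => tau
  | f + 1, dist, tau, u :: q =>
    let neighbors := adj.getD u []
    if dist.getD u 0 = radius then pvBfsB adj te radius f dist tau q
    else
      let s := neighbors.foldl (pvStepB te u) (dist, tau, q)
      pvBfsB adj te radius f s.1 s.2.1 s.2.2

def gauge_from_tree_alt (base_adj : List (Int × List Int)) (twisted_edge : Option (Int × Int)) (root_u : Int) (radius : Int) : List (Int × Int) :=
  let te := twisted_edge.map (fun t => pySort2 t.1 t.2)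
  (pvBfsB (PySem.Dict.ofList base_adj) te radius (pvFuel base_adj)
    (PySem.Dict.empty.insert root_u 0) (PySem.Dict.empty.insert root_u 0) [root_u]).items

-- ===== PRECONDITION & SPEC =====

-- the set of nodes within graph distance n of the start set (one closure round per step)
def pvBallIter (base_adj : List (Int × List Int)) : Nat → List Int → List Int
  | 0, s => s
  | n + 1, s => pvBallIter base_adj n
      (PySem.List.dedup (s ++ s.flatMap (fun x => (PySem.Dict.ofList base_adj).getD x [])))

-- depth after which the radius-ball is complete (a ball of negative radius is the whole component)
def pvBallDepth (base_adj : List (Int × List Int)) (radius : Int) : Nat :=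
  if radius < 0 then base_adj.length + 1 else min radius.toNat (base_adj.length + 1)

-- Pre_ excludes exactly the inputs on which Python A raises KeyError: some node of the
-- radius-ball around root_u (the nodes A's loops pop) is not a key of base_adj.
def Pre_gauge_from_tree (base_adj : List (Int × List Int)) (twisted_edge : Option (Int × Int)) (root_u : Int) (radius : Int) : Prop :=
  ∀ x ∈ pvBallIter base_adj (pvBallDepth base_adj radius) [root_u], x ∈ base_adj.map Prod.fst

instance (base_adj : List (Int × List Int)) (twisted_edge : Option (Int × Int)) (root_u : Int) (radius : Int) : Decidable (Pre_gauge_from_tree base_adj twisted_edge root_u radius) := by unfold Pre_gauge_from_tree; infer_instance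

def pvWitness_gauge_from_tree : (List (Int × List Int)) × (Option (Int × Int)) × Int × Int :=
  ([(0, [1]), (1, [0, 2]), (2, [1])], some (0, 1), 0, 2)

def Spec_gauge_from_tree (base_adj : List (Int × List Int)) (twisted_edge : Option (Int × Int)) (root_u : Int) (radius : Int) (out : List (Int × Int)) : Prop := out = gauge_from_tree_alt base_adj twisted_edge root_u radius
instance (base_adj : List (Int × List Int)) (twisted_edge : Option (Int × Int)) (root_u : Int) (radius : Int) (out : List (Int × Int)) : Decidable (Spec_gauge_from_tree base_adj twisted_edge root_u radius out) := by unfold Spec_gauge_from_tree; infer_instance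

-- ===== CLAIM (what is proved, stated in full; the proofs are below) =====
def Claim_equal_gauge_from_tree : Prop := ∀ (base_adj : List (Int × List Int)) (twisted_edge : Option (Int × Int)) (root_u : Int) (radius : Int), Dom_gauge_from_tree base_adj twisted_edge root_u radius → Pre_gauge_from_tree base_adj twisted_edge root_u radius → Spec_gauge_from_tree base_adj twisted_edge root_u radius (gauge_from_tree base_adj twisted_edge root_u radius)

-- ===== LEMMAS AND PROOFS =====

-- The master BFS used only by the proofs: one pass maintaining dist, parent, tau and the queue.
def pvStepM (te : Option (Int × Int)) (u : Int)
    (s : PySem.Dict Int Int × PySem.Dict Int (Option Int) × PySem.Dict Int Int × List Int) (w : Int) :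
    PySem.Dict Int Int × PySem.Dict Int (Option Int) × PySem.Dict Int Int × List Int :=
  if (s.1.get? w).isSome then s
  else
    (s.1.insert w (s.1.getD u 0 + 1),
     s.2.1.insert w (some u),
     s.2.2.1.insert w (PySem.Int.bxor (s.2.2.1.getD u 0) (pvSigT te u w)),
     s.2.2.2 ++ [w])

def pvMrun (adj : PySem.Dict Int (List Int)) (te : Option (Int × Int)) (radius : Int) :
    Nat → PySem.Dict Int Int → PySem.Dict Int (Option Int) → PySem.Dict Int Int → List Int →
    PySem.Dict Int Int × PySem.Dict Int (Option Int) × PySem.Dict Int Int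
  | 0, d, p, t, _ => (d, p, t)
  | _ + 1, d, p, t, [] => (d, p, t)
  | f + 1, d, p, t, u :: q =>
    if d.getD u 0 = radius then pvMrun adj te radius f d p t q
    else
      let s := (adj.getD u []).foldl (pvStepM te u) (d, p, t, q)
      pvMrun adj te radius f s.1 s.2.1 s.2.2.1 s.2.2.2

-- invariants
def pvKEq (d : PySem.Dict Int Int) (p : PySem.Dict Int (Option Int)) (t : PySem.Dict Int Int) : Prop :=
  ∀ k : Int, (p.get? k).isSome = (d.get? k).isSome ∧ (t.get? k).isSome = (d.get? k).isSome

def pvQInv (d : PySem.Dict Int Int) (q : List Int) : Prop :=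
  q.Nodup ∧ ∀ u ∈ q, (d.get? u).isSome

def pvPInv (d : PySem.Dict Int Int) (p : PySem.Dict Int (Option Int)) (q : List Int) : Prop :=
  ∀ w v : Int, p.get? w = some (some v) → v ∉ q ∧ (d.get? v).isSome

lemma pvKEq_insert {d : PySem.Dict Int Int} {p : PySem.Dict Int (Option Int)} {t : PySem.Dict Int Int}
    (h : pvKEq d p t) (w : Int) (a : Int) (b : Option Int) (c : Int) :
    pvKEq (d.insert w a) (p.insert w b) (t.insert w c) := by
  intro k
  by_cases hk : k = w
  · subst hk; simp [PySem.Dict.get?_insert_self]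
  · simp [PySem.Dict.get?_insert_of_ne _ _ hk, h k]

lemma pvStepM_keq {te u} {s} (h : pvKEq s.1 s.2.1 s.2.2.1) (w : Int) :
    pvKEq (pvStepM te u s w).1 (pvStepM te u s w).2.1 (pvStepM te u s w).2.2.1 := by
  unfold pvStepM
  split
  · exact h
  · exact pvKEq_insert h w _ _ _

lemma pvFoldM_ext_dist (te : Option (Int × Int)) (u : Int) :
    ∀ (l : List Int) (s : _) (k : Int) (v : Int), s.1.get? k = some v →
      ((l.foldl (pvStepM te u) s).1.get? k = some v) := by
  intro l
  induction l with
  | nil => intro s k v h; simpa using h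
  | cons w l ih =>
    intro s k v h
    simp only [List.foldl_cons]
    apply ih
    unfold pvStepM
    split
    · exact h
    · next hw =>
      have hk : k ≠ w := by
        intro e; subst e; rw [h] at hw; simp at hw
      simpa [PySem.Dict.get?_insert_of_ne _ _ hk] using h

lemma pvFoldM_keq (te : Option (Int × Int)) (u : Int) :
    ∀ (l : List Int) (s : _), pvKEq s.1 s.2.1 s.2.2.1 →
      pvKEq (l.foldl (pvStepM te u) s).1 (l.foldl (pvStepM te u) s).2.1 (l.foldl (pvStepM te u) s).2.2.1 := by
  intro l
  induction l with
  | nil => intro s h; simpa using h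
  | cons w l ih =>
    intro s h
    simp only [List.foldl_cons]
    exact ih _ (pvStepM_keq h w)

lemma pvFoldM_ext_parent (te : Option (Int × Int)) (u : Int) :
    ∀ (l : List Int) (s : _) (k : Int) (x : Option Int), pvKEq s.1 s.2.1 s.2.2.1 →
      s.2.1.get? k = some x → ((l.foldl (pvStepM te u) s).2.1.get? k = some x) := by
  intro l
  induction l with
  | nil => intro s k x _ h; simpa using h
  | cons w l ih =>
    intro s k x hK h
    simp only [List.foldl_cons]
    refine ih _ k x (pvStepM_keq hK w) ?_
    unfold pvStepM
    split
    · exact h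
    · next hw =>
      have hk : k ≠ w := by
        intro e; subst e
        have := (hK k).1
        rw [h] at this; simp at this
        rw [this] at hw; simp at hw
      simpa [PySem.Dict.get?_insert_of_ne _ _ hk] using h

lemma pvMrun_ext_dist (adj : PySem.Dict Int (List Int)) (te : Option (Int × Int)) (radius : Int) :
    ∀ (f : Nat) (d : PySem.Dict Int Int) (p : PySem.Dict Int (Option Int)) (t : PySem.Dict Int Int)
      (q : List Int) (k : Int) (v : Int), d.get? k = some v →
      (pvMrun adj te radius f d p t q).1.get? k = some v := by
  intro f
  induction f with
  | zero => intro d p t q k v h; simpa [pvMrun] using h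
  | succ f ih =>
    intro d p t q k v h
    cases q with
    | nil => simpa [pvMrun] using h
    | cons u q =>
      unfold pvMrun
      split
      · exact ih _ _ _ _ _ _ h
      · exact ih _ _ _ _ _ _ (pvFoldM_ext_dist te u _ _ _ _ h)

lemma pvMrun_ext_parent (adj : PySem.Dict Int (List Int)) (te : Option (Int × Int)) (radius : Int) :
    ∀ (f : Nat) (d : PySem.Dict Int Int) (p : PySem.Dict Int (Option Int)) (t : PySem.Dict Int Int)
      (q : List Int) (k : Int) (x : Option Int), pvKEq d p t → p.get? k = some x →
      (pvMrun adj te radius f d p t q).2.1.get? k = some x := by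
  intro f
  induction f with
  | zero => intro d p t q k x _ h; simpa [pvMrun] using h
  | succ f ih =>
    intro d p t q k x hK h
    cases q with
    | nil => simpa [pvMrun] using h
    | cons u q =>
      unfold pvMrun
      split
      · exact ih _ _ _ _ _ _ hK h
      · exact ih _ _ _ _ _ _ (pvFoldM_keq te u _ _ hK)
          (pvFoldM_ext_parent te u _ _ _ _ hK h)

-- one fold step preserves the invariant bundle
lemma pvStepM_inv (te : Option (Int × Int)) (u : Int)
    (s : PySem.Dict Int Int × PySem.Dict Int (Option Int) × PySem.Dict Int Int × List Int) (w : Int)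
    (hK : pvKEq s.1 s.2.1 s.2.2.1) (hQ : pvQInv s.1 s.2.2.2) (hP : pvPInv s.1 s.2.1 s.2.2.2)
    (hu : (s.1.get? u).isSome) (hunq : u ∉ s.2.2.2) :
    pvKEq (pvStepM te u s w).1 (pvStepM te u s w).2.1 (pvStepM te u s w).2.2.1 ∧
    pvQInv (pvStepM te u s w).1 (pvStepM te u s w).2.2.2 ∧
    pvPInv (pvStepM te u s w).1 (pvStepM te u s w).2.1 (pvStepM te u s w).2.2.2 ∧
    ((pvStepM te u s w).1.get? u).isSome ∧ u ∉ (pvStepM te u s w).2.2.2 := by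
  unfold pvStepM
  split
  · exact ⟨hK, hQ, hP, hu, hunq⟩
  · next hw =>
    have hwn : s.1.get? w = none := by
      cases h : s.1.get? w
      · rfl
      · rw [h] at hw; simp at hw
    have hwq : w ∉ s.2.2.2 := by
      intro hin
      have := hQ.2 w hin
      rw [hwn] at this; simp at this
    have huw : u ≠ w := by
      intro e; subst e; rw [hwn] at hu; simp at hu
    refine ⟨pvKEq_insert hK w _ _ _, ⟨?_, ?_⟩, ?_, ?_, ?_⟩
    · simp only [List.nodup_append]
      refine ⟨hQ.1, by simp, ?_⟩
      intro a ha b hb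
      simp at hb; subst hb
      intro e; exact hwq (e ▸ ha)
    · intro k hk
      rcases List.mem_append.1 hk with hk | hk
      · by_cases hkw : k = w
        · subst hkw; simp [PySem.Dict.get?_insert_self]
        · rw [PySem.Dict.get?_insert_of_ne _ _ hkw]; exact hQ.2 k hk
      · simp at hk; subst hk; simp [PySem.Dict.get?_insert_self]
    · intro w' v hpv
      by_cases hw' : w' = w
      · subst hw'
        rw [PySem.Dict.get?_insert_self] at hpv
        have hv : v = u := by injection hpv with h1; injection h1 with h2; exact h2.symm
        subst hv
        refine ⟨?_, ?_⟩
        · intro hin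
          rcases List.mem_append.1 hin with h | h
          · exact hunq h
          · simp at h; exact huw h
        · rw [PySem.Dict.get?_insert_of_ne _ _ huw]; exact hu
      · rw [PySem.Dict.get?_insert_of_ne _ _ hw'] at hpv
        obtain ⟨hv1, hv2⟩ := hP w' v hpv
        have hvw : v ≠ w := by
          intro e; subst e; rw [hwn] at hv2; simp at hv2
        refine ⟨?_, ?_⟩
        · intro hin
          rcases List.mem_append.1 hin with h | h
          · exact hv1 h
          · simp at h; exact hvw h
        · rw [PySem.Dict.get?_insert_of_ne _ _ hvw]; exact hv2
    · rw [PySem.Dict.get?_insert_of_ne _ _ huw]; exact hu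
    · intro hin
      rcases List.mem_append.1 hin with h | h
      · exact hunq h
      · simp at h; exact huw h

lemma pvFoldM_inv (te : Option (Int × Int)) (u : Int) :
    ∀ (l : List Int) (s : _),
      pvKEq s.1 s.2.1 s.2.2.1 → pvQInv s.1 s.2.2.2 → pvPInv s.1 s.2.1 s.2.2.2 →
      (s.1.get? u).isSome → u ∉ s.2.2.2 →
      pvKEq (l.foldl (pvStepM te u) s).1 (l.foldl (pvStepM te u) s).2.1 (l.foldl (pvStepM te u) s).2.2.1 ∧
      pvQInv (l.foldl (pvStepM te u) s).1 (l.foldl (pvStepM te u) s).2.2.2 ∧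
      pvPInv (l.foldl (pvStepM te u) s).1 (l.foldl (pvStepM te u) s).2.1 (l.foldl (pvStepM te u) s).2.2.2 ∧
      ((l.foldl (pvStepM te u) s).1.get? u).isSome ∧ u ∉ (l.foldl (pvStepM te u) s).2.2.2 := by
  intro l
  induction l with
  | nil => intro s h1 h2 h3 h4 h5; exact ⟨h1, h2, h3, h4, h5⟩
  | cons w l ih =>
    intro s h1 h2 h3 h4 h5
    simp only [List.foldl_cons]
    obtain ⟨a, b, c, d, e⟩ := pvStepM_inv te u s w h1 h2 h3 h4 h5
    exact ih _ a b c d e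

-- every parent entry created by the fold points to the popped node u
lemma pvFoldM_parent_new (te : Option (Int × Int)) (u : Int) :
    ∀ (l : List Int) (s : _) (w : Int) (x : Option Int),
      (l.foldl (pvStepM te u) s).2.1.get? w = some x →
      s.2.1.get? w = some x ∨ x = some u := by
  intro l
  induction l with
  | nil => intro s w x h; exact Or.inl (by simpa using h)
  | cons w' l ih =>
    intro s w x h
    simp only [List.foldl_cons] at h
    rcases ih _ _ _ h with h' | h'
    · unfold pvStepM at h'
      split at h'
      · exact Or.inl h'
      · by_cases hw : w = w'
        · subst hw
          rw [PySem.Dict.get?_insert_self] at h'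
          exact Or.inr (by injection h' with hh; exact hh.symm)
        · rw [PySem.Dict.get?_insert_of_ne _ _ hw] at h'
          exact Or.inl h'
    · exact Or.inr h'

-- queue elements after the fold were in the queue before, or were fresh
lemma pvFoldM_q_sub (te : Option (Int × Int)) (u : Int) :
    ∀ (l : List Int) (s : _) (k : Int), k ∈ (l.foldl (pvStepM te u) s).2.2.2 →
      k ∈ s.2.2.2 ∨ s.1.get? k = none := by
  intro l
  induction l with
  | nil => intro s k h; exact Or.inl (by simpa using h)
  | cons w l ih =>
    intro s k h
    simp only [List.foldl_cons] at h
    rcases ih _ _ h with h' | h'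
    · unfold pvStepM at h'
      split at h'
      · exact Or.inl h'
      · next hw =>
        rcases List.mem_append.1 h' with h'' | h''
        · exact Or.inl h''
        · simp at h''; subst h''
          right; cases hkw : s.1.get? k
          · rfl
          · rw [hkw] at hw; simp at hw
    · unfold pvStepM at h'
      split at h'
      · exact Or.inr h'
      · next hw =>
        by_cases hk : k = w
        · subst hk; rw [PySem.Dict.get?_insert_self] at h'; simp at h'
        · rw [PySem.Dict.get?_insert_of_ne _ _ hk] at h'
          exact Or.inr h'

-- no future parent entry can point to an already-expanded node u
lemma pvMrun_parent_ne (adj : PySem.Dict Int (List Int)) (te : Option (Int × Int)) (radius : Int) (u : Int) :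
    ∀ (f : Nat) (d : PySem.Dict Int Int) (p : PySem.Dict Int (Option Int)) (t : PySem.Dict Int Int) (q : List Int),
      pvKEq d p t → pvQInv d q → pvPInv d p q →
      (d.get? u).isSome → u ∉ q → (∀ w, p.get? w ≠ some (some u)) →
      ∀ w, (pvMrun adj te radius f d p t q).2.1.get? w ≠ some (some u) := by
  intro f
  induction f with
  | zero => intro d p t q _ _ _ _ _ hnot w; simpa [pvMrun] using hnot w
  | succ f ih =>
    intro d p t q hK hQ hP hu hq hnot w
    cases q with
    | nil => simpa [pvMrun] using hnot w
    | cons u' q =>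
      have huu' : u ≠ u' := by intro e; subst e; exact hq (List.mem_cons_self)
      have hq' : u ∉ q := fun h => hq (List.mem_cons_of_mem _ h)
      have hQ' : pvQInv d q := ⟨hQ.1.of_cons, fun k hk => hQ.2 k (List.mem_cons_of_mem _ hk)⟩
      have hP' : pvPInv d p q := fun w' v h =>
        ⟨fun hin => (hP w' v h).1 (List.mem_cons_of_mem _ hin), (hP w' v h).2⟩
      unfold pvMrun
      split
      · exact ih d p t q hK hQ' hP' hu hq' hnot w
      · have hu'd : (d.get? u').isSome := hQ.2 u' List.mem_cons_self
        have hu'q : u' ∉ q := (List.nodup_cons.1 hQ.1).1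
        obtain ⟨hK1, hQ1, hP1, hu1, hq1⟩ :=
          pvFoldM_inv te u' (adj.getD u' []) (d, p, t, q) hK hQ' hP' hu'd hu'q
        obtain ⟨v, hv⟩ := Option.isSome_iff_exists.1 hu
        have huD : ((((adj.getD u' []).foldl (pvStepM te u') (d, p, t, q))).1.get? u).isSome := by
          rw [pvFoldM_ext_dist te u' _ _ _ _ hv]; rfl
        have huQ : u ∉ (((adj.getD u' []).foldl (pvStepM te u') (d, p, t, q))).2.2.2 := by
          intro hin
          rcases pvFoldM_q_sub te u' _ _ _ hin with h | h
          · exact hq' h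
          · rw [hv] at h; simp at h
        have hnot1 : ∀ w', (((adj.getD u' []).foldl (pvStepM te u') (d, p, t, q))).2.1.get? w' ≠ some (some u) := by
          intro w' hcon
          rcases pvFoldM_parent_new te u' _ _ _ _ hcon with h | h
          · exact hnot w' h
          · exact huu' (Option.some.inj h)
        exact ih _ _ _ _ hK1 hQ1 hP1 huD huQ hnot1 w

-- ---- P1: loop 1 is the dist projection of the master run ----
lemma pvFold1_proj (te : Option (Int × Int)) (u : Int) :
    ∀ (l : List Int) (s : _),
      l.foldl (pvStep1 u) (s.1, s.2.2.2) =
        ((l.foldl (pvStepM te u) s).1, (l.foldl (pvStepM te u) s).2.2.2) := by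
  intro l
  induction l with
  | nil => intro s; rfl
  | cons w l ih =>
    intro s
    have hstep : pvStep1 u (s.1, s.2.2.2) w = ((pvStepM te u s w).1, (pvStepM te u s w).2.2.2) := by
      by_cases hw : (s.1.get? w).isSome <;> simp [pvStep1, pvStepM, hw]
    simp only [List.foldl_cons, hstep]
    exact ih (pvStepM te u s w)

lemma pvBfs1_eq (adj : PySem.Dict Int (List Int)) (te : Option (Int × Int)) (radius : Int) :
    ∀ (f : Nat) (d : PySem.Dict Int Int) (p : PySem.Dict Int (Option Int)) (t : PySem.Dict Int Int) (q : List Int),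
      pvBfs1 adj radius f d q = (pvMrun adj te radius f d p t q).1 := by
  intro f
  induction f with
  | zero => intro d p t q; rfl
  | succ f ih =>
    intro d p t q
    cases q with
    | nil => rfl
    | cons u q =>
      have hp : (adj.getD u []).foldl (pvStep1 u) (d, q) =
          (((adj.getD u []).foldl (pvStepM te u) (d, p, t, q)).1,
           ((adj.getD u []).foldl (pvStepM te u) (d, p, t, q)).2.2.2) :=
        pvFold1_proj te u (adj.getD u []) (d, p, t, q)
      simp only [pvBfs1, pvMrun]
      split
      · exact ih d p t q
      · simp only [hp]
        exact ih _ _ _ _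

-- ---- P4: B's loop is the (dist, tau) projection of the master run ----
lemma pvFoldB_proj (te : Option (Int × Int)) (u : Int) :
    ∀ (l : List Int) (s : _),
      l.foldl (pvStepB te u) (s.1, s.2.2.1, s.2.2.2) =
        ((l.foldl (pvStepM te u) s).1, (l.foldl (pvStepM te u) s).2.2.1, (l.foldl (pvStepM te u) s).2.2.2) := by
  intro l
  induction l with
  | nil => intro s; rfl
  | cons w l ih =>
    intro s
    have hstep : pvStepB te u (s.1, s.2.2.1, s.2.2.2) w =
        ((pvStepM te u s w).1, (pvStepM te u s w).2.2.1, (pvStepM te u s w).2.2.2) := by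
      by_cases hw : (s.1.get? w).isSome <;> simp [pvStepB, pvStepM, hw]
    simp only [List.foldl_cons, hstep]
    exact ih (pvStepM te u s w)

lemma pvBfsB_eq (adj : PySem.Dict Int (List Int)) (te : Option (Int × Int)) (radius : Int) :
    ∀ (f : Nat) (d : PySem.Dict Int Int) (p : PySem.Dict Int (Option Int)) (t : PySem.Dict Int Int) (q : List Int),
      pvBfsB adj te radius f d t q = (pvMrun adj te radius f d p t q).2.2 := by
  intro f
  induction f with
  | zero => intro d p t q; rfl
  | succ f ih =>
    intro d p t q
    cases q with
    | nil => rfl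
    | cons u q =>
      have hp : (adj.getD u []).foldl (pvStepB te u) (d, t, q) =
          (((adj.getD u []).foldl (pvStepM te u) (d, p, t, q)).1,
           ((adj.getD u []).foldl (pvStepM te u) (d, p, t, q)).2.2.1,
           ((adj.getD u []).foldl (pvStepM te u) (d, p, t, q)).2.2.2) :=
        pvFoldB_proj te u (adj.getD u []) (d, p, t, q)
      simp only [pvBfsB, pvMrun]
      split
      · exact ih d p t q
      · simp only [hp]
        exact ih _ _ _ _

-- ---- P2: loop 2 is the parent projection of the master run ----
lemma pvFold2_eq (te : Option (Int × Int)) (ball : PySem.Dict Int Int) (u : Int) :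
    ∀ (l : List Int) (s : _),
      pvKEq s.1 s.2.1 s.2.2.1 →
      (∀ k v, ((l.foldl (pvStepM te u) s).1.get? k = some v) → ball.get? k = some v) →
      l.foldl (pvStep2 ball u) (s.2.1, s.2.2.2) =
        ((l.foldl (pvStepM te u) s).2.1, (l.foldl (pvStepM te u) s).2.2.2) := by
  intro l
  induction l with
  | nil => intro s _ _; rfl
  | cons w l ih =>
    intro s hK H
    simp only [List.foldl_cons] at H ⊢
    by_cases hw : (s.1.get? w).isSome
    · have hstepM : pvStepM te u s w = s := by simp [pvStepM, hw]
      have hpw : (s.2.1.get? w).isSome = true := by rw [(hK w).1]; exact hw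
      have hstep2 : pvStep2 ball u (s.2.1, s.2.2.2) w = (s.2.1, s.2.2.2) := by
        simp [pvStep2, hpw]
      rw [hstep2, hstepM]
      rw [hstepM] at H
      exact ih s hK H
    · have hwn : s.1.get? w = none := by
        cases h : s.1.get? w
        · rfl
        · rw [h] at hw; simp at hw
      have hpwn : s.2.1.get? w = none := by
        have := (hK w).1
        rw [hwn] at this; simp at this
        cases h : s.2.1.get? w
        · rfl
        · rw [h] at this; simp at this
      have hball : (ball.get? w).isSome := by
        have h1 : ((pvStepM te u s w).1.get? w) = some (s.1.getD u 0 + 1) := by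
          simp [pvStepM, hwn, PySem.Dict.get?_insert_self]
        have h2 := pvFoldM_ext_dist te u l (pvStepM te u s w) w _ h1
        rw [H w _ h2]; rfl
      have hstep2 : pvStep2 ball u (s.2.1, s.2.2.2) w =
          (s.2.1.insert w (some u), s.2.2.2 ++ [w]) := by
        simp [pvStep2, hball, hpwn]
      have hstepM : pvStepM te u s w =
          (s.1.insert w (s.1.getD u 0 + 1), s.2.1.insert w (some u),
           s.2.2.1.insert w (PySem.Int.bxor (s.2.2.1.getD u 0) (pvSigT te u w)),
           s.2.2.2 ++ [w]) := by
        simp [pvStepM, hwn]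
      rw [hstep2]
      have := ih (pvStepM te u s w) (pvStepM_keq hK w) H
      rw [hstepM] at this
      rw [hstepM]
      exact this

lemma pvBfs2_eq (adj : PySem.Dict Int (List Int)) (te : Option (Int × Int)) (radius : Int) (ball : PySem.Dict Int Int) :
    ∀ (f : Nat) (d : PySem.Dict Int Int) (p : PySem.Dict Int (Option Int)) (t : PySem.Dict Int Int) (q : List Int),
      pvKEq d p t → pvQInv d q → pvPInv d p q →
      (∀ k v, ((pvMrun adj te radius f d p t q).1.get? k = some v) → ball.get? k = some v) →
      pvBfs2 adj ball radius f p q = (pvMrun adj te radius f d p t q).2.1 := by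
  intro f
  induction f with
  | zero => intro d p t q _ _ _ _; rfl
  | succ f ih =>
    intro d p t q hK hQ hP H
    cases q with
    | nil => rfl
    | cons u q =>
      obtain ⟨v, hv⟩ := Option.isSome_iff_exists.1 (hQ.2 u List.mem_cons_self)
      have hball_u : ball.get? u = some v :=
        H u v (pvMrun_ext_dist adj te radius (f + 1) d p t (u :: q) u v hv)
      have hbd : ball.getD u 0 = d.getD u 0 := by
        rw [PySem.Dict.getD_eq_get?_getD, PySem.Dict.getD_eq_get?_getD, hv, hball_u]
      have hQ' : pvQInv d q := ⟨hQ.1.of_cons, fun k hk => hQ.2 k (List.mem_cons_of_mem _ hk)⟩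
      have hP' : pvPInv d p q := fun w' v' h =>
        ⟨fun hin => (hP w' v' h).1 (List.mem_cons_of_mem _ hin), (hP w' v' h).2⟩
      have hud : (d.get? u).isSome := hQ.2 u List.mem_cons_self
      have huq : u ∉ q := (List.nodup_cons.1 hQ.1).1
      by_cases hg : d.getD u 0 = radius
      · have hrun : pvMrun adj te radius (f + 1) d p t (u :: q) = pvMrun adj te radius f d p t q := by
          simp [pvMrun, hg]
        have hbfs : pvBfs2 adj ball radius (f + 1) p (u :: q) = pvBfs2 adj ball radius f p q := by
          simp [pvBfs2, hbd, hg]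
        rw [hrun, hbfs]
        exact ih d p t q hK hQ' hP' (fun k v' h => H k v' (by rw [hrun]; exact h))
      · obtain ⟨hK1, hQ1, hP1, _, _⟩ :=
          pvFoldM_inv te u (adj.getD u []) (d, p, t, q) hK hQ' hP' hud huq
        have hrun : pvMrun adj te radius (f + 1) d p t (u :: q) =
            pvMrun adj te radius f ((adj.getD u []).foldl (pvStepM te u) (d, p, t, q)).1
              ((adj.getD u []).foldl (pvStepM te u) (d, p, t, q)).2.1
              ((adj.getD u []).foldl (pvStepM te u) (d, p, t, q)).2.2.1
              ((adj.getD u []).foldl (pvStepM te u) (d, p, t, q)).2.2.2 := by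
          simp [pvMrun, hg]
      -- H transferred to the folded state
        have H1 : ∀ k v', ((pvMrun adj te radius f ((adj.getD u []).foldl (pvStepM te u) (d, p, t, q)).1
              ((adj.getD u []).foldl (pvStepM te u) (d, p, t, q)).2.1
              ((adj.getD u []).foldl (pvStepM te u) (d, p, t, q)).2.2.1
              ((adj.getD u []).foldl (pvStepM te u) (d, p, t, q)).2.2.2).1.get? k = some v') →
            ball.get? k = some v' := fun k v' h => H k v' (by rw [hrun]; exact h)
        have Hf : ∀ k v', (((adj.getD u []).foldl (pvStepM te u) (d, p, t, q)).1.get? k = some v') →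
            ball.get? k = some v' := fun k v' h =>
          H1 k v' (pvMrun_ext_dist adj te radius f _ _ _ _ k v' h)
        have hfold := pvFold2_eq te ball u (adj.getD u []) (d, p, t, q) hK Hf
        have hbfs : pvBfs2 adj ball radius (f + 1) p (u :: q) =
            pvBfs2 adj ball radius f ((adj.getD u []).foldl (pvStep2 ball u) (p, q)).1
              ((adj.getD u []).foldl (pvStep2 ball u) (p, q)).2 := by
          simp [pvBfs2, hbd, hg]
        rw [hbfs, hrun]
        have h1 : ((adj.getD u []).foldl (pvStep2 ball u) (p, q)).1 =
            ((adj.getD u []).foldl (pvStepM te u) (d, p, t, q)).2.1 := by rw [hfold]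
        have h2 : ((adj.getD u []).foldl (pvStep2 ball u) (p, q)).2 =
            ((adj.getD u []).foldl (pvStepM te u) (d, p, t, q)).2.2.2 := by rw [hfold]
        rw [h1, h2]
        exact ih _ _ _ _ hK1 hQ1 hP1 H1
  

-- ---- P3: A's third loop versus the master run (duplicate neighbour entries allowed) ----
-- A's third loop re-enqueues a node for every matching occurrence; extra pops are no-ops
-- on tau.  pvExp d pend q says: queue q consists of the pending first occurrences `pend`
-- (in order) interleaved (before their own pending occurrence only) with stale duplicates
-- of already-expanded nodes of d.

inductive pvExp (d : PySem.Dict Int Int) : List Int → List Int → Prop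
  | nil : pvExp d [] []
  | stale {x : Int} {pend q : List Int} :
      (d.get? x).isSome → x ∉ pend → pvExp d pend q → pvExp d pend (x :: q)
  | head {x : Int} {pend q : List Int} : pvExp d pend q → pvExp d (x :: pend) (x :: q)

lemma pvExp_append {d : PySem.Dict Int Int} {pend q : List Int} (h : pvExp d pend q) :
    ∀ x : Int, (d.get? x).isSome → pvExp d pend (q ++ [x]) := by
  induction h with
  | nil => intro x hx; exact pvExp.stale hx (by simp) pvExp.nil
  | stale hy hnp _ ih => intro x hx; exact pvExp.stale hy hnp (ih x hx)
  | head _ ih => intro x hx; exact pvExp.head (ih x hx)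

lemma pvExp_append_list {d : PySem.Dict Int Int} {pend : List Int} :
    ∀ (B q : List Int), pvExp d pend q → (∀ y ∈ B, (d.get? y).isSome) → pvExp d pend (q ++ B) := by
  intro B
  induction B with
  | nil => intro q h _; simpa using h
  | cons y B ih =>
    intro q h hB
    have h1 : pvExp d pend (q ++ [y]) := pvExp_append h y (hB y List.mem_cons_self)
    have h2 := ih (q ++ [y]) h1 (fun z hz => hB z (List.mem_cons_of_mem _ hz))
    simpa using h2

lemma pvExp_concat {d d' : PySem.Dict Int Int} {p₁ q₁ : List Int}
    (h₁ : pvExp d p₁ q₁)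
    (hsub : ∀ k v, d.get? k = some v → d'.get? k = some v) :
    ∀ {p₂ q₂ : List Int}, pvExp d' p₂ q₂ → (∀ y ∈ p₂, d.get? y = none) →
      pvExp d' (p₁ ++ p₂) (q₁ ++ q₂) := by
  induction h₁ with
  | nil => intro p₂ q₂ h₂ _; simpa using h₂
  | stale hx hnp _ ih =>
    intro p₂ q₂ h₂ hfr
    obtain ⟨v, hv⟩ := Option.isSome_iff_exists.1 hx
    refine pvExp.stale (by rw [hsub _ _ hv]; rfl) ?_ (ih h₂ hfr)
    intro hmem
    rcases List.mem_append.1 hmem with h | h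
    · exact hnp h
    · rw [hfr _ h] at hv; cases hv
  | head _ ih =>
    intro p₂ q₂ h₂ hfr
    exact pvExp.head (ih h₂ hfr)

-- inserting an already-present binding leaves the dict unchanged
lemma pvInsert_eq_self (d : PySem.Dict Int Int) (k : Int) (v : Int)
    (hnd : d.keys.Nodup) (h : d.get? k = some v) : d.insert k v = d := by
  have hc : d.contains k = true := by
    rw [PySem.Dict.contains_eq_isSome_get?, h]; rfl
  apply PySem.Dict.ext
  rw [PySem.Dict.items_insert_of_contains _ _ hc]
  have hmap : ∀ p ∈ d.items, (if (p.1 == k) = true then (k, v) else p) = p := by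
    intro p hp
    split
    · next he =>
      have hk : p.1 = k := by simpa using he
      have hp' : (k, p.2) ∈ d.items := by rw [← hk]; exact hp
      have := PySem.Dict.get?_of_mem_items d hp' hnd
      rw [h] at this
      have hv : v = p.2 := by injection this
      rw [hv, ← hk]
    · rfl
  rw [List.map_congr_left hmap]
  simp

-- tau-side extension lemmas
lemma pvFoldM_ext_tau (te : Option (Int × Int)) (u : Int) :
    ∀ (l : List Int) (s : _) (k : Int) (x : Int), pvKEq s.1 s.2.1 s.2.2.1 →
      s.2.2.1.get? k = some x → ((l.foldl (pvStepM te u) s).2.2.1.get? k = some x) := by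
  intro l
  induction l with
  | nil => intro s k x _ h; simpa using h
  | cons w l ih =>
    intro s k x hK h
    simp only [List.foldl_cons]
    refine ih _ k x (pvStepM_keq hK w) ?_
    unfold pvStepM
    split
    · exact h
    · next hw =>
      have hk : k ≠ w := by
        intro e; subst e
        have := (hK k).2
        rw [h] at this; simp at this
        rw [this] at hw; simp at hw
      simpa [PySem.Dict.get?_insert_of_ne _ _ hk] using h

-- where a parent entry of the rest of the run can come from
lemma pvMrun_parent_src (adj : PySem.Dict Int (List Int)) (te : Option (Int × Int)) (radius : Int) :
    ∀ (f : Nat) (d : PySem.Dict Int Int) (p : PySem.Dict Int (Option Int)) (t : PySem.Dict Int Int)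
      (q : List Int) (w : Int) (x : Option Int),
      (pvMrun adj te radius f d p t q).2.1.get? w = some x →
      p.get? w = some x ∨ ∃ v, x = some v ∧ (v ∈ q ∨ d.get? v = none) := by
  intro f
  induction f with
  | zero => intro d p t q w x h; exact Or.inl (by simpa [pvMrun] using h)
  | succ f ih =>
    intro d p t q w x h
    cases q with
    | nil => exact Or.inl (by simpa [pvMrun] using h)
    | cons u q =>
      unfold pvMrun at h
      split at h
      · rcases ih _ _ _ _ _ _ h with h' | ⟨v, hv, h'⟩
        · exact Or.inl h'
        · rcases h' with h' | h'
          · exact Or.inr ⟨v, hv, Or.inl (List.mem_cons_of_mem _ h')⟩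
          · exact Or.inr ⟨v, hv, Or.inr h'⟩
      · rcases ih _ _ _ _ _ _ h with h' | ⟨v, hv, h'⟩
        · rcases pvFoldM_parent_new te u _ _ _ _ h' with h'' | h''
          · exact Or.inl h''
          · exact Or.inr ⟨u, h'', Or.inl List.mem_cons_self⟩
        · rcases h' with h' | h'
          · rcases pvFoldM_q_sub te u _ _ _ h' with h'' | h''
            · exact Or.inr ⟨v, hv, Or.inl (List.mem_cons_of_mem _ h'')⟩
            · exact Or.inr ⟨v, hv, Or.inr h''⟩
          · have : d.get? v = none := by
              cases hdv : d.get? v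
              · rfl
              · have := pvFoldM_ext_dist te u (adj.getD u []) (d, p, t, q) v _ hdv
                rw [this] at h'; cases h'
            exact Or.inr ⟨v, hv, Or.inr this⟩

-- extra master-run invariants: depth links, value bounds, key provenance, key uniqueness
def pvDV (d : PySem.Dict Int Int) (p : PySem.Dict Int (Option Int)) : Prop :=
  ∀ w x : Int, p.get? w = some (some x) → d.getD w 0 = d.getD x 0 + 1

def pvVB (d : PySem.Dict Int Int) : Prop :=
  ∀ k v : Int, d.get? k = some v → 0 ≤ v ∧ v < (d.size : Int)

def pvKS (r0 : Int) (flat : List Int) (d : PySem.Dict Int Int) : Prop :=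
  ∀ k ∈ d.keys, k = r0 ∨ k ∈ flat

def pvXInv (r0 : Int) (flat : List Int) (d : PySem.Dict Int Int)
    (p : PySem.Dict Int (Option Int)) (t : PySem.Dict Int Int) : Prop :=
  pvDV d p ∧ pvVB d ∧ pvKS r0 flat d ∧ d.keys.Nodup ∧ t.keys.Nodup

lemma pvStepM_xinv (te : Option (Int × Int)) (u : Int) (r0 : Int) (flat : List Int)
    (s : PySem.Dict Int Int × PySem.Dict Int (Option Int) × PySem.Dict Int Int × List Int) (w : Int)
    (hK : pvKEq s.1 s.2.1 s.2.2.1)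
    (hPl : ∀ w' v, s.2.1.get? w' = some (some v) → (s.1.get? v).isSome)
    (hu : (s.1.get? u).isSome) (hwf : w ∈ flat)
    (hX : pvXInv r0 flat s.1 s.2.1 s.2.2.1) :
    pvXInv r0 flat (pvStepM te u s w).1 (pvStepM te u s w).2.1 (pvStepM te u s w).2.2.1 := by
  obtain ⟨hDV, hVB, hKS, hdnd, htnd⟩ := hX
  unfold pvStepM
  split
  · exact ⟨hDV, hVB, hKS, hdnd, htnd⟩
  · next hw =>
    have hwn : s.1.get? w = none := by
      cases h : s.1.get? w
      · rfl
      · rw [h] at hw; simp at hw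
    have hcont : s.1.contains w = false := by
      rw [PySem.Dict.contains_eq_isSome_get?, hwn]; rfl
    have hsz : (s.1.insert w (s.1.getD u 0 + 1)).size = s.1.size + 1 := by
      rw [PySem.Dict.size_insert]; simp [hcont]
    have huw : u ≠ w := by
      intro e; subst e; rw [hwn] at hu; simp at hu
    obtain ⟨vu, hvu⟩ := Option.isSome_iff_exists.1 hu
    refine ⟨?_, ?_, ?_, ?_, ?_⟩
    · intro w' x' h
      by_cases hw' : w' = w
      · subst hw'
        rw [PySem.Dict.get?_insert_self] at h
        have hx' : x' = u := by
          have := Option.some.inj h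
          exact (Option.some.inj this).symm
        subst hx'
        rw [PySem.Dict.getD_insert, PySem.Dict.getD_insert, if_pos rfl, if_neg huw]
      · rw [PySem.Dict.get?_insert_of_ne _ _ hw'] at h
        have hold := hDV w' x' h
        have hx'd : (s.1.get? x').isSome := hPl w' x' h
        have hx'w : x' ≠ w := by
          intro e; subst e; rw [hwn] at hx'd; simp at hx'd
        rw [PySem.Dict.getD_insert, PySem.Dict.getD_insert, if_neg hw', if_neg hx'w]
        exact hold
    · intro k v h
      rw [hsz]
      by_cases hk : k = w
      · subst hk
        rw [PySem.Dict.get?_insert_self] at h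
        have hv : v = s.1.getD u 0 + 1 := (Option.some.inj h).symm
        have := hVB u vu hvu
        have hgd : s.1.getD u 0 = vu := by
          rw [PySem.Dict.getD_eq_get?_getD, hvu]; rfl
        subst hv
        rw [hgd]
        push_cast
        omega
      · rw [PySem.Dict.get?_insert_of_ne _ _ hk] at h
        have := hVB k v h
        push_cast
        omega
    · intro k hk
      rw [PySem.Dict.mem_keys_insert] at hk
      rcases hk with hk | hk
      · subst hk; exact Or.inr hwf
      · exact hKS k hk
    · exact PySem.Dict.nodup_keys_insert _ _ _ hdnd
    · exact PySem.Dict.nodup_keys_insert _ _ _ htnd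

lemma pvFoldM_xinv (te : Option (Int × Int)) (u : Int) (r0 : Int) (flat : List Int) :
    ∀ (l : List Int) (s : _),
      (∀ w ∈ l, w ∈ flat) →
      pvKEq s.1 s.2.1 s.2.2.1 → pvQInv s.1 s.2.2.2 → pvPInv s.1 s.2.1 s.2.2.2 →
      (s.1.get? u).isSome → u ∉ s.2.2.2 →
      pvXInv r0 flat s.1 s.2.1 s.2.2.1 →
      pvXInv r0 flat (l.foldl (pvStepM te u) s).1 (l.foldl (pvStepM te u) s).2.1
        (l.foldl (pvStepM te u) s).2.2.1 := by
  intro l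
  induction l with
  | nil => intro s _ _ _ _ _ _ hX; simpa using hX
  | cons w l ih =>
    intro s hlf hK hQ hP hu hunq hX
    simp only [List.foldl_cons]
    obtain ⟨hK', hQ', hP', hu', hunq'⟩ := pvStepM_inv te u s w hK hQ hP hu hunq
    refine ih _ (fun y hy => hlf y (List.mem_cons_of_mem _ hy)) hK' hQ' hP' hu' hunq' ?_
    exact pvStepM_xinv te u r0 flat s w hK (fun w' v h => (hP w' v h).2) hu
      (hlf w List.mem_cons_self) hX

lemma pvMrun_xinv (adj : PySem.Dict Int (List Int)) (te : Option (Int × Int)) (radius : Int)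
    (r0 : Int) (flat : List Int) (hadj : ∀ x : Int, ∀ w ∈ adj.getD x [], w ∈ flat) :
    ∀ (f : Nat) (d : PySem.Dict Int Int) (p : PySem.Dict Int (Option Int)) (t : PySem.Dict Int Int)
      (q : List Int),
      pvKEq d p t → pvQInv d q → pvPInv d p q → pvXInv r0 flat d p t →
      pvDV (pvMrun adj te radius f d p t q).1 (pvMrun adj te radius f d p t q).2.1 ∧
      pvVB (pvMrun adj te radius f d p t q).1 ∧
      pvKS r0 flat (pvMrun adj te radius f d p t q).1 ∧
      (pvMrun adj te radius f d p t q).1.keys.Nodup := by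
  intro f
  induction f with
  | zero =>
    intro d p t q _ _ _ hX
    exact ⟨hX.1, hX.2.1, hX.2.2.1, hX.2.2.2.1⟩
  | succ f ih =>
    intro d p t q hK hQ hP hX
    cases q with
    | nil => exact ⟨hX.1, hX.2.1, hX.2.2.1, hX.2.2.2.1⟩
    | cons u q =>
      have hud : (d.get? u).isSome := hQ.2 u List.mem_cons_self
      have huq : u ∉ q := (List.nodup_cons.1 hQ.1).1
      have hQ' : pvQInv d q := ⟨hQ.1.of_cons, fun k hk => hQ.2 k (List.mem_cons_of_mem _ hk)⟩
      have hP' : pvPInv d p q := fun w' v' h =>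
        ⟨fun hin => (hP w' v' h).1 (List.mem_cons_of_mem _ hin), (hP w' v' h).2⟩
      unfold pvMrun
      split
      · exact ih d p t q hK hQ' hP' hX
      · obtain ⟨hK1, hQ1, hP1, _, _⟩ :=
          pvFoldM_inv te u (adj.getD u []) (d, p, t, q) hK hQ' hP' hud huq
        exact ih _ _ _ _ hK1 hQ1 hP1
          (pvFoldM_xinv te u r0 flat (adj.getD u []) (d, p, t, q) (hadj u) hK hQ' hP' hud huq hX)

-- size of a dict whose keys come from r0 :: flat without repetition
lemma pvSize_bound (r0 : Int) (flat : List Int) (d : PySem.Dict Int Int)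
    (hnd : d.keys.Nodup) (hKS : pvKS r0 flat d) : d.size ≤ flat.length + 1 := by
  have hsub : d.keys ⊆ r0 :: flat := by
    intro k hk
    rcases hKS k hk with h | h
    · subst h; exact List.mem_cons_self
    · exact List.mem_cons_of_mem _ h
  have := (hnd.subperm hsub).length_le
  simpa [PySem.Dict.size, PySem.Dict.keys] using this

-- a pop of an already-expanded node is a no-op on tau and only re-enqueues its children
lemma pvFold3S (ball : PySem.Dict Int Int) (pfin : PySem.Dict Int (Option Int))
    (tw : Option (Int × Int)) (u : Int) (t : PySem.Dict Int Int) (htnd : t.keys.Nodup) :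
    ∀ (l : List Int) (q₃ order : List Int),
      (∀ w ∈ l, pfin.getD w none = some u →
        t.get? w = some (PySem.Int.bxor (t.getD u 0) (pvSigma tw u w))) →
      (l.foldl (pvStep3 ball pfin tw u) (t, q₃, order)).1 = t ∧
      ∃ B, (l.foldl (pvStep3 ball pfin tw u) (t, q₃, order)).2.1 = q₃ ++ B ∧
        (∀ w ∈ B, pfin.getD w none = some u) ∧ B.length ≤ l.length := by
  intro l
  induction l with
  | nil => intro q₃ order _; exact ⟨rfl, [], by simp, by simp, by simp⟩
  | cons w l ih =>
    intro q₃ order hR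
    simp only [List.foldl_cons]
    by_cases hc : ((ball.get? w).isSome && (pfin.getD w none == some u)) = true
    · have hpw : pfin.getD w none = some u := by
        have hc' := hc
        rw [Bool.and_eq_true] at hc'
        simpa using hc'.2
      have hins := hR w List.mem_cons_self hpw
      have hstep : pvStep3 ball pfin tw u (t, q₃, order) w = (t, q₃ ++ [w], order ++ [w]) := by
        simp only [pvStep3, hc, if_true]
        rw [pvInsert_eq_self _ _ _ htnd hins]
      rw [hstep]
      obtain ⟨h1, B, h2, h3, h4⟩ := ih (q₃ ++ [w]) (order ++ [w])
        (fun y hy => hR y (List.mem_cons_of_mem _ hy))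
      refine ⟨h1, w :: B, ?_, ?_, ?_⟩
      · rw [h2]; simp
      · intro y hy
        rcases List.mem_cons.1 hy with hy | hy
        · subst hy; exact hpw
        · exact h3 y hy
      · simpa using Nat.succ_le_succ h4
    · have hstep : pvStep3 ball pfin tw u (t, q₃, order) w = (t, q₃, order) := by
        simp only [pvStep3]
        rw [if_neg]
        simp [hc]
      rw [hstep]
      obtain ⟨h1, B, h2, h3, h4⟩ := ih q₃ order (fun y hy => hR y (List.mem_cons_of_mem _ hy))
      exact ⟨h1, B, h2, h3, by simpa using Nat.le_succ_of_le h4⟩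

-- the first pop of a node u runs in lockstep with the master fold, except that repeated
-- occurrences of a just-discovered child re-enqueue it (a no-op on tau)
lemma pvFold3P (te : Option (Int × Int)) (ball : PySem.Dict Int Int)
    (pfin : PySem.Dict Int (Option Int)) (tw : Option (Int × Int)) (u : Int)
    (hte : ∀ a b : Int, pvSigma tw a b = pvSigT te a b) :
    ∀ (l : List Int) (s : _) (q₃ order : List Int),
      pvKEq s.1 s.2.1 s.2.2.1 →
      s.2.2.1.keys.Nodup →
      (s.1.get? u).isSome →
      (∀ w, (s.1.get? w).isSome → s.2.1.get? w = some (some u) →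
        s.2.2.1.get? w = some (PySem.Int.bxor (s.2.2.1.getD u 0) (pvSigT te u w))) →
      (∀ k v, ((l.foldl (pvStepM te u) s).1.get? k = some v) → ball.get? k = some v) →
      (∀ k x, ((l.foldl (pvStepM te u) s).2.1.get? k = some x) → pfin.get? k = some x) →
      (l.foldl (pvStep3 ball pfin tw u) (s.2.2.1, q₃, order)).1 = (l.foldl (pvStepM te u) s).2.2.1 ∧
      (∀ w, ((l.foldl (pvStepM te u) s).1.get? w).isSome →
        (l.foldl (pvStepM te u) s).2.1.get? w = some (some u) →
        (l.foldl (pvStepM te u) s).2.2.1.get? w =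
          some (PySem.Int.bxor ((l.foldl (pvStepM te u) s).2.2.1.getD u 0) (pvSigT te u w))) ∧
      ∃ B Mw,
        (l.foldl (pvStep3 ball pfin tw u) (s.2.2.1, q₃, order)).2.1 = q₃ ++ B ∧
        (l.foldl (pvStepM te u) s).2.2.2 = s.2.2.2 ++ Mw ∧
        pvExp (l.foldl (pvStepM te u) s).1 Mw B ∧
        (∀ w ∈ B, pfin.get? w = some (some u)) ∧
        B.length ≤ l.length ∧
        (∀ y ∈ Mw, s.1.get? y = none) ∧
        (∀ y : Int, ((l.foldl (pvStepM te u) s).1.get? y).isSome →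
          (s.1.get? y).isSome ∨ y ∈ Mw) ∧
        (l.foldl (pvStepM te u) s).1.size = s.1.size + Mw.length := by
  intro l
  induction l with
  | nil =>
    intro s q₃ order hK htnd hu hFI _ _
    exact ⟨rfl, hFI, [], [], by simp, by simp, pvExp.nil, by simp, by simp, by simp,
      fun y h => Or.inl h, by simp⟩
  | cons w l ih =>
    intro s q₃ order hK htnd hu hFI Hball Hpfin
    simp only [List.foldl_cons] at Hball Hpfin ⊢
    by_cases hw : (s.1.get? w).isSome
    · -- w already discovered: the master fold skips
      have hstepM : pvStepM te u s w = s := by simp [pvStepM, hw]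
      rw [hstepM] at Hball Hpfin ⊢
      obtain ⟨x, hx⟩ : ∃ x, s.2.1.get? w = some x := by
        apply Option.isSome_iff_exists.1
        rw [(hK w).1]; exact hw
      have hpfinw : pfin.get? w = some x :=
        Hpfin w x (pvFoldM_ext_parent te u l s w x hK hx)
      by_cases hxu : x = some u
      · -- a repeated occurrence of a child discovered in this very pop: no-op re-enqueue
        subst hxu
        have hins : s.2.2.1.get? w =
            some (PySem.Int.bxor (s.2.2.1.getD u 0) (pvSigT te u w)) := hFI w hw hx
        have hballw : (ball.get? w).isSome := by
          obtain ⟨v, hv⟩ := Option.isSome_iff_exists.1 hw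
          rw [Hball w v (pvFoldM_ext_dist te u l s w v hv)]; rfl
        have hc : ((ball.get? w).isSome && (pfin.getD w none == some u)) = true := by
          rw [PySem.Dict.getD_eq_get?_getD, hpfinw, hballw]; simp
        have hstep : pvStep3 ball pfin tw u (s.2.2.1, q₃, order) w =
            (s.2.2.1, q₃ ++ [w], order ++ [w]) := by
          simp only [pvStep3, hc, if_true]
          rw [hte u w, pvInsert_eq_self _ _ _ htnd hins]
        rw [hstep]
        obtain ⟨h1, hFIend, B, Mw, h2, h3, h4, h5, hlen, h6, h8, h7⟩ :=
          ih s (q₃ ++ [w]) (order ++ [w]) hK htnd hu hFI Hball Hpfin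
        refine ⟨h1, hFIend, w :: B, Mw, ?_, h3, ?_, ?_, by simpa using Nat.succ_le_succ hlen, h6, h8, h7⟩
        · rw [h2]; simp
        · refine pvExp.stale ?_ ?_ h4
          · obtain ⟨v, hv⟩ := Option.isSome_iff_exists.1 hw
            rw [pvFoldM_ext_dist te u l s w v hv]; rfl
          · intro hmem
            have := h6 w hmem
            rw [this] at hw; simp at hw
        · intro y hy
          rcases List.mem_cons.1 hy with hy | hy
          · subst hy; exact hpfinw
          · exact h5 y hy
      · -- an occurrence of an older node: both sides skip
        have hc : ((ball.get? w).isSome && (pfin.getD w none == some u)) = false := by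
          rw [PySem.Dict.getD_eq_get?_getD, hpfinw]
          simp only [Option.getD_some]
          rw [Bool.and_eq_false_iff]
          right
          simpa using hxu
        have hstep : pvStep3 ball pfin tw u (s.2.2.1, q₃, order) w = (s.2.2.1, q₃, order) := by
          simp only [pvStep3]
          rw [if_neg]
          simp [hc]
        rw [hstep]
        obtain ⟨h1, hFIend, B, Mw, h2, h3, h4, h5, hlen, h6, h8, h7⟩ :=
          ih s q₃ order hK htnd hu hFI Hball Hpfin
        exact ⟨h1, hFIend, B, Mw, h2, h3, h4, h5, by simpa using Nat.le_succ_of_le hlen, h6, h8, h7⟩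
    · -- fresh child: both sides act
      have hwn : s.1.get? w = none := by
        cases h : s.1.get? w
        · rfl
        · rw [h] at hw; simp at hw
      have hcont : s.1.contains w = false := by
        rw [PySem.Dict.contains_eq_isSome_get?, hwn]; rfl
      have huw : u ≠ w := by
        intro e; subst e; rw [hwn] at hu; simp at hu
      have hstepM : pvStepM te u s w =
          (s.1.insert w (s.1.getD u 0 + 1), s.2.1.insert w (some u),
           s.2.2.1.insert w (PySem.Int.bxor (s.2.2.1.getD u 0) (pvSigT te u w)),
           s.2.2.2 ++ [w]) := by
        simp [pvStepM, hwn]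
      have hK1 := @pvStepM_keq te u s hK w
      have hpw : (pvStepM te u s w).2.1.get? w = some (some u) := by
        rw [hstepM]; simp [PySem.Dict.get?_insert_self]
      have hpfinw : pfin.get? w = some (some u) :=
        Hpfin w _ (pvFoldM_ext_parent te u l (pvStepM te u s w) w _ hK1 hpw)
      have hdw : (pvStepM te u s w).1.get? w = some (s.1.getD u 0 + 1) := by
        rw [hstepM]; simp [PySem.Dict.get?_insert_self]
      have hballw : (ball.get? w).isSome := by
        rw [Hball w _ (pvFoldM_ext_dist te u l (pvStepM te u s w) w _ hdw)]; rfl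
      have hc : ((ball.get? w).isSome && (pfin.getD w none == some u)) = true := by
        rw [PySem.Dict.getD_eq_get?_getD, hpfinw, hballw]; simp
      have hstep : pvStep3 ball pfin tw u (s.2.2.1, q₃, order) w =
          ((pvStepM te u s w).2.2.1, q₃ ++ [w], order ++ [w]) := by
        simp only [pvStep3, hc, if_true]
        rw [hte u w, hstepM]
      have htnd1 : (pvStepM te u s w).2.2.1.keys.Nodup := by
        rw [hstepM]; exact PySem.Dict.nodup_keys_insert _ _ _ htnd
      have hu1 : ((pvStepM te u s w).1.get? u).isSome := by
        rw [hstepM]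
        obtain ⟨v, hv⟩ := Option.isSome_iff_exists.1 hu
        simp only []
        rw [PySem.Dict.get?_insert_of_ne _ _ huw, hv]; rfl
      have hgdu : (pvStepM te u s w).2.2.1.getD u 0 = s.2.2.1.getD u 0 := by
        rw [hstepM]
        simp only []
        rw [PySem.Dict.getD_insert, if_neg huw]
      have hFI1 : ∀ w', ((pvStepM te u s w).1.get? w').isSome →
          (pvStepM te u s w).2.1.get? w' = some (some u) →
          (pvStepM te u s w).2.2.1.get? w' =
            some (PySem.Int.bxor ((pvStepM te u s w).2.2.1.getD u 0) (pvSigT te u w')) := by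
        intro w' hw'd hw'p
        rw [hgdu]
        by_cases hww' : w' = w
        · subst hww'
          rw [hstepM]
          simp [PySem.Dict.get?_insert_self]
        · rw [hstepM] at hw'd hw'p ⊢
          simp only [] at hw'd hw'p ⊢
          rw [PySem.Dict.get?_insert_of_ne _ _ hww'] at hw'd hw'p
          rw [PySem.Dict.get?_insert_of_ne _ _ hww']
          exact hFI w' hw'd hw'p
      rw [hstep]
      obtain ⟨h1, hFIend, B, Mw, h2, h3, h4, h5, hlen, h6, h8, h7⟩ :=
        ih (pvStepM te u s w) (q₃ ++ [w]) (order ++ [w]) hK1 htnd1 hu1 hFI1 Hball Hpfin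
      refine ⟨h1, hFIend, w :: B, w :: Mw, ?_, ?_, ?_, ?_, by simpa using Nat.succ_le_succ hlen, ?_, ?_, ?_⟩
      · rw [h2]; simp
      · rw [h3, hstepM]; simp
      · exact pvExp.head h4
      · intro y hy
        rcases List.mem_cons.1 hy with hy | hy
        · subst hy; exact hpfinw
        · exact h5 y hy
      · intro y hy
        rcases List.mem_cons.1 hy with hy | hy
        · subst hy; exact hwn
        · have := h6 y hy
          rw [hstepM] at this
          simp only [] at this
          by_cases hyw : y = w
          · subst hyw; exact hwn
          · rw [PySem.Dict.get?_insert_of_ne _ _ hyw] at this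
            exact this
      · intro y hy
        rcases h8 y hy with h' | h'
        · rw [hstepM] at h'
          simp only [] at h'
          by_cases hyw : y = w
          · subst hyw; exact Or.inr List.mem_cons_self
          · rw [PySem.Dict.get?_insert_of_ne _ _ hyw] at h'
            exact Or.inl h'
        · exact Or.inr (List.mem_cons_of_mem _ h')
      · rw [h7, hstepM]
        simp only []
        rw [PySem.Dict.size_insert]
        simp [hcont, List.length_cons]
        omega

-- the termination potential of A's third loop: deeper queue entries weigh geometrically less
def pvWt (ball : PySem.Dict Int Int) (E : Nat) (x : Int) : Nat :=
  (E + 2) ^ (E + 1 - (ball.getD x 0).toNat)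

def pvW (ball : PySem.Dict Int Int) (E : Nat) (q : List Int) : Nat :=
  (q.map (pvWt ball E)).sum

lemma pvW_append (ball : PySem.Dict Int Int) (E : Nat) (q₁ q₂ : List Int) :
    pvW ball E (q₁ ++ q₂) = pvW ball E q₁ + pvW ball E q₂ := by
  simp [pvW]

lemma pvSum_const : ∀ (B : List Int) (f : Int → Nat) (c : Nat),
    (∀ w ∈ B, f w = c) → (B.map f).sum = B.length * c := by
  intro B
  induction B with
  | nil => intro f c _; simp
  | cons y B ih =>
    intro f c h
    simp only [List.map_cons, List.sum_cons, List.length_cons]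
    rw [h y List.mem_cons_self, ih f c (fun z hz => h z (List.mem_cons_of_mem _ hz))]
    ring

lemma pvWt_dec (ball : PySem.Dict Int Int) (E : Nat) (x : Int) (B : List Int)
    (hdep : (ball.getD x 0).toNat ≤ E)
    (hB : ∀ w ∈ B, (ball.getD w 0).toNat = (ball.getD x 0).toNat + 1)
    (hlen : B.length ≤ E + 1) :
    pvW ball E B + 1 ≤ pvWt ball E x := by
  have hwc : ∀ w ∈ B, pvWt ball E w = (E + 2) ^ (E - (ball.getD x 0).toNat) := by
    intro w hw
    unfold pvWt
    rw [hB w hw]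
    congr 1
    omega
  have hsum : pvW ball E B = B.length * (E + 2) ^ (E - (ball.getD x 0).toNat) :=
    pvSum_const B _ _ hwc
  have hx : pvWt ball E x = (E + 2) * (E + 2) ^ (E - (ball.getD x 0).toNat) := by
    unfold pvWt
    rw [show E + 1 - (ball.getD x 0).toNat = (E - (ball.getD x 0).toNat) + 1 by omega]
    ring
  have hpos : 1 ≤ (E + 2) ^ (E - (ball.getD x 0).toNat) := Nat.one_le_pow _ _ (by omega)
  have hmul : B.length * (E + 2) ^ (E - (ball.getD x 0).toNat) ≤
      (E + 1) * (E + 2) ^ (E - (ball.getD x 0).toNat) :=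
    Nat.mul_le_mul_right _ hlen
  rw [hsum, hx]
  have : (E + 2) * (E + 2) ^ (E - (ball.getD x 0).toNat) =
      (E + 1) * (E + 2) ^ (E - (ball.getD x 0).toNat) + (E + 2) ^ (E - (ball.getD x 0).toNat) := by
    ring
  omega

lemma pvExp_cons_inv {d : PySem.Dict Int Int} {pend q : List Int} {x : Int}
    (h : pvExp d pend (x :: q)) :
    ((d.get? x).isSome ∧ x ∉ pend ∧ pvExp d pend q) ∨
      (∃ pend', pend = x :: pend' ∧ pvExp d pend' q) := by
  cases h with
  | stale h1 h2 h3 => exact Or.inl ⟨h1, h2, h3⟩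
  | head h1 => exact Or.inr ⟨_, rfl, h1⟩

-- the main simulation: A's third loop computes the master run's tau
lemma pvBfs3_main (adj : PySem.Dict Int (List Int)) (te : Option (Int × Int)) (radius : Int)
    (ball : PySem.Dict Int Int) (pfin : PySem.Dict Int (Option Int)) (tw : Option (Int × Int))
    (r0 : Int) (flat : List Int) (E : Nat)
    (hte : ∀ a b : Int, pvSigma tw a b = pvSigT te a b)
    (hEflat : flat.length ≤ E)
    (hflatl : ∀ x : Int, ∀ w ∈ adj.getD x [], w ∈ flat)
    (hadjlen : ∀ x : Int, (adj.getD x []).length ≤ E + 1)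
    (hdepth : ∀ w x : Int, pfin.get? w = some (some x) →
      ball.getD w 0 = ball.getD x 0 + 1)
    (hdbound : ∀ (k : Int) (v : Int), ball.get? k = some v → 0 ≤ v ∧ v.toNat ≤ E) :
    ∀ (f₃ fM : Nat) (d : PySem.Dict Int Int) (p : PySem.Dict Int (Option Int))
      (t : PySem.Dict Int Int) (q qq order : List Int),
      pvKEq d p t → pvQInv d q → pvPInv d p q →
      pvXInv r0 flat d p t →
      q.length + (E + 1 - d.size) ≤ fM →
      (∀ x : Int, (d.get? x).isSome → x ∉ q → ∀ w : Int,
        pfin.get? w = some (some x) →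
        t.get? w = some (PySem.Int.bxor (t.getD x 0) (pvSigT te x w))) →
      ball = (pvMrun adj te radius fM d p t q).1 →
      pfin = (pvMrun adj te radius fM d p t q).2.1 →
      pvExp d q qq →
      pvW ball E qq < f₃ →
      pvBfs3 adj ball pfin tw f₃ t order qq = (pvMrun adj te radius fM d p t q).2.2 := by
  intro f₃
  induction f₃ with
  | zero => intros; omega
  | succ f₃ ih =>
    intro fM d p t q qq order hK hQ hP hX hPhi R4 hballeq hpfineq hExp hW
    have htnd : t.keys.Nodup := hX.2.2.2.2
    cases qq with
    | nil =>
      cases hExp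
      cases fM <;> rfl
    | cons x qq' =>
      -- the ball-weight of any node of d is defined and its value matches ball
      have hball_of_d : ∀ (k : Int) (v : Int), d.get? k = some v → ball.get? k = some v := by
        intro k v h
        rw [hballeq]
        exact pvMrun_ext_dist adj te radius fM d p t q k v h
      rcases pvExp_cons_inv hExp with ⟨hxd, hxnp, hExp'⟩ | ⟨qM', rfl, hExp'⟩
      ·
        -- a stale pop: no-op on tau, re-enqueues children of x
        have R4x := R4 x hxd hxnp
        have hR : ∀ w ∈ adj.getD x [], pfin.getD w none = some x →
            t.get? w = some (PySem.Int.bxor (t.getD x 0) (pvSigma tw x w)) := by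
          intro w _ hpw
          have hpw' : pfin.get? w = some (some x) := by
            rw [PySem.Dict.getD_eq_get?_getD] at hpw
            cases h : pfin.get? w with
            | none => rw [h] at hpw; simp at hpw
            | some y => rw [h] at hpw; simp at hpw; rw [hpw]
          rw [hte x w]
          exact R4x w hpw'
        obtain ⟨h1, B, h2, h3, hBlen⟩ := pvFold3S ball pfin tw x t htnd (adj.getD x []) qq' order hR
        have hBmem : ∀ w ∈ B, pfin.get? w = some (some x) := by
          intro w hw
          have hpw := h3 w hw
          rw [PySem.Dict.getD_eq_get?_getD] at hpw
          cases h : pfin.get? w with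
          | none => rw [h] at hpw; simp at hpw
          | some y => rw [h] at hpw; simp at hpw; rw [hpw]
        have hBd : ∀ w ∈ B, (d.get? w).isSome := by
          intro w hw
          have := R4x w (hBmem w hw)
          have htw : (t.get? w).isSome := by rw [this]; rfl
          rw [(hK w).2] at htw
          exact htw
        have hbfs : pvBfs3 adj ball pfin tw (f₃ + 1) t order (x :: qq') =
            pvBfs3 adj ball pfin tw f₃ t
              ((adj.getD x []).foldl (pvStep3 ball pfin tw x) (t, qq', order)).2.2
              (qq' ++ B) := by
          simp only [pvBfs3, h1, h2]
        rw [hbfs]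
        refine ih fM d p t q (qq' ++ B)
          ((adj.getD x []).foldl (pvStep3 ball pfin tw x) (t, qq', order)).2.2
          hK hQ hP hX hPhi R4 hballeq hpfineq
          (pvExp_append_list B qq' hExp' hBd) ?_
        -- weight decreases
        obtain ⟨v, hv⟩ := Option.isSome_iff_exists.1 hxd
        have hbx : ball.get? x = some v := hball_of_d x v hv
        have hdepx : (ball.getD x 0).toNat ≤ E := by
          have := hdbound x v hbx
          have hg : ball.getD x 0 = v := by
            rw [PySem.Dict.getD_eq_get?_getD, hbx]; rfl
          rw [hg]; exact this.2
        have hdec := pvWt_dec ball E x B hdepx ?_ ?_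
        · have hWx : pvW ball E (x :: qq') = pvWt ball E x + pvW ball E qq' := by
            simp [pvW, pvWt]
          rw [pvW_append]
          rw [hWx] at hW
          omega
        · intro w hw
          have hd := hdepth w x (hBmem w hw)
          have hvx : ball.getD x 0 = v := by
            rw [PySem.Dict.getD_eq_get?_getD, hbx]; rfl
          have h0 : 0 ≤ v := (hdbound x v hbx).1
          rw [hd, hvx]
          omega
        · exact le_trans hBlen (hadjlen x)
      · have hxd : (d.get? x).isSome := hQ.2 x List.mem_cons_self
        have hxq : x ∉ qM' := (List.nodup_cons.1 hQ.1).1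
        have hQ' : pvQInv d qM' := ⟨hQ.1.of_cons, fun k hk => hQ.2 k (List.mem_cons_of_mem _ hk)⟩
        have hP' : pvPInv d p qM' := fun w' v' h =>
          ⟨fun hin => (hP w' v' h).1 (List.mem_cons_of_mem _ hin), (hP w' v' h).2⟩
        have hnone : ∀ w', p.get? w' ≠ some (some x) := fun w' hc =>
          (hP w' x hc).1 List.mem_cons_self
        obtain ⟨v, hv⟩ := Option.isSome_iff_exists.1 hxd
        have hbx : ball.get? x = some v := hball_of_d x v hv
        have hbd : ball.getD x 0 = d.getD x 0 := by
          rw [PySem.Dict.getD_eq_get?_getD, PySem.Dict.getD_eq_get?_getD, hv, hbx]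
        have hdepx : (ball.getD x 0).toNat ≤ E := by
          have := (hdbound x v hbx).2
          have hg : ball.getD x 0 = v := by
            rw [PySem.Dict.getD_eq_get?_getD, hbx]; rfl
          rw [hg]; exact this
        have hwtx : 1 ≤ pvWt ball E x := Nat.one_le_pow _ _ (by omega)
        have hWx : pvW ball E (x :: qq') = pvWt ball E x + pvW ball E qq' := by
          simp [pvW]
        cases fM with
        | zero =>
          exfalso
          rw [List.length_cons] at hPhi
          omega
        | succ fM' =>
          by_cases hg : d.getD x 0 = radius
          · -- boundary node: the master run skips, the third loop matches nothing
            have hrun : pvMrun adj te radius (fM' + 1) d p t (x :: qM') =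
                pvMrun adj te radius fM' d p t qM' := by
              simp [pvMrun, hg]
            have hnm : ∀ w, pfin.get? w ≠ some (some x) := by
              intro w hcon
              rw [hpfineq, hrun] at hcon
              exact pvMrun_parent_ne adj te radius x fM' d p t qM' hK hQ' hP' hxd hxq hnone w hcon
            have hR : ∀ w ∈ adj.getD x [], pfin.getD w none = some x →
                t.get? w = some (PySem.Int.bxor (t.getD x 0) (pvSigma tw x w)) := by
              intro w _ hpw
              exfalso
              apply hnm w
              rw [PySem.Dict.getD_eq_get?_getD] at hpw
              cases h : pfin.get? w with
              | none => rw [h] at hpw; simp at hpw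
              | some y => rw [h] at hpw; simp at hpw; rw [hpw]
            obtain ⟨h1, B, h2, h3, _⟩ := pvFold3S ball pfin tw x t htnd (adj.getD x []) qq' order hR
            have hBnil : B = [] := by
              cases B with
              | nil => rfl
              | cons b B =>
                exfalso
                have hpw := h3 b List.mem_cons_self
                apply hnm b
                rw [PySem.Dict.getD_eq_get?_getD] at hpw
                cases h : pfin.get? b with
                | none => rw [h] at hpw; simp at hpw
                | some y => rw [h] at hpw; simp at hpw; rw [hpw]
            subst hBnil
            have hbfs : pvBfs3 adj ball pfin tw (f₃ + 1) t order (x :: qq') =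
                pvBfs3 adj ball pfin tw f₃ t
                  ((adj.getD x []).foldl (pvStep3 ball pfin tw x) (t, qq', order)).2.2 qq' := by
              simp only [pvBfs3, h1, h2, List.append_nil]
            rw [hbfs, hrun]
            refine ih fM' d p t qM' qq'
              ((adj.getD x []).foldl (pvStep3 ball pfin tw x) (t, qq', order)).2.2
              hK hQ' hP' hX ?_ ?_ (by rw [hballeq, hrun]) (by rw [hpfineq, hrun]) hExp' ?_
            · rw [List.length_cons] at hPhi; omega
            · intro x' hx'd hx'q w hpw
              by_cases hx'x : x' = x
              · subst hx'x; exact absurd hpw (hnm w)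
              · refine R4 x' hx'd ?_ w hpw
                intro hin
                rcases List.mem_cons.1 hin with h | h
                · exact hx'x h
                · exact hx'q h
            · omega
          · -- first pop of x: lockstep with the master fold
            have hrun : pvMrun adj te radius (fM' + 1) d p t (x :: qM') =
                pvMrun adj te radius fM'
                  ((adj.getD x []).foldl (pvStepM te x) (d, p, t, qM')).1
                  ((adj.getD x []).foldl (pvStepM te x) (d, p, t, qM')).2.1
                  ((adj.getD x []).foldl (pvStepM te x) (d, p, t, qM')).2.2.1
                  ((adj.getD x []).foldl (pvStepM te x) (d, p, t, qM')).2.2.2 := by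
              simp [pvMrun, hg]
            obtain ⟨hK1, hQ1, hP1, hxd1, hxq1⟩ :=
              pvFoldM_inv te x (adj.getD x []) (d, p, t, qM') hK hQ' hP' hxd hxq
            have hX1 := pvFoldM_xinv te x r0 flat (adj.getD x []) (d, p, t, qM')
              (hflatl x) hK hQ' hP' hxd hxq hX
            have Hball : ∀ k v', (((adj.getD x []).foldl (pvStepM te x) (d, p, t, qM')).1.get? k = some v') →
                ball.get? k = some v' := by
              intro k v' h
              rw [hballeq, hrun]
              exact pvMrun_ext_dist adj te radius fM' _ _ _ _ k v' h
            have Hpfin : ∀ k x', (((adj.getD x []).foldl (pvStepM te x) (d, p, t, qM')).2.1.get? k = some x') →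
                pfin.get? k = some x' := by
              intro k x' h
              rw [hpfineq, hrun]
              exact pvMrun_ext_parent adj te radius fM' _ _ _ _ k x' hK1 h
            have hFI0 : ∀ w, (d.get? w).isSome → p.get? w = some (some x) →
                t.get? w = some (PySem.Int.bxor (t.getD x 0) (pvSigT te x w)) := by
              intro w _ hpw
              exact absurd hpw (hnone w)
            obtain ⟨h1, hFIend, B, Mw, h2, h3, h4, h5, hBlen, h6, h8, h7⟩ :=
              pvFold3P te ball pfin tw x hte (adj.getD x []) (d, p, t, qM') qq' order
                hK htnd hxd hFI0 Hball Hpfin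
            have hszF : ((adj.getD x []).foldl (pvStepM te x) (d, p, t, qM')).1.size ≤ E + 1 := by
              have := pvSize_bound r0 flat _ hX1.2.2.2.1 hX1.2.2.1
              omega
            -- R4 at the post-pop state
            have R4' : ∀ x' : Int,
                ((((adj.getD x []).foldl (pvStepM te x) (d, p, t, qM')).1.get? x')).isSome →
                x' ∉ (((adj.getD x []).foldl (pvStepM te x) (d, p, t, qM'))).2.2.2 →
                ∀ w : Int, pfin.get? w = some (some x') →
                (((adj.getD x []).foldl (pvStepM te x) (d, p, t, qM'))).2.2.1.get? w =
                  some (PySem.Int.bxor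
                    ((((adj.getD x []).foldl (pvStepM te x) (d, p, t, qM'))).2.2.1.getD x' 0)
                    (pvSigT te x' w)) := by
              intro x' hx'd hx'q w hpw
              by_cases hx'x : x' = x
              · subst hx'x
                have hpw' : (((adj.getD x' []).foldl (pvStepM te x') (d, p, t, qM'))).2.1.get? w =
                    some (some x') := by
                  rw [hpfineq, hrun] at hpw
                  rcases pvMrun_parent_src adj te radius fM' _ _ _ _ w (some x') hpw with h' | ⟨vv, hveq, h'⟩
                  · exact h'
                  · exfalso
                    have hvv : vv = x' := by
                      have := Option.some.inj hveq
                      exact this.symm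
                    subst hvv
                    rcases h' with h' | h'
                    · exact hx'q h'
                    · rw [h'] at hx'd; simp at hx'd
                have hwd : ((((adj.getD x' []).foldl (pvStepM te x') (d, p, t, qM'))).1.get? w).isSome := by
                  rw [← (hK1 w).1, hpw']; rfl
                exact hFIend w hwd hpw'
              · -- an older expanded node
                have hx'q0 : x' ∉ qM' := by
                  intro hin
                  apply hx'q
                  rw [h3]
                  exact List.mem_append.2 (Or.inl hin)
                have hx'dold : (d.get? x').isSome := by
                  rcases h8 x' hx'd with h' | h'
                  · exact h'
                  · exfalso
                    apply hx'q
                    rw [h3]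
                    exact List.mem_append.2 (Or.inr h')
                have hx'notx : x' ∉ (x :: qM') := by
                  intro hin
                  rcases List.mem_cons.1 hin with h | h
                  · exact hx'x h
                  · exact hx'q0 h
                have hold := R4 x' hx'dold hx'notx w hpw
                obtain ⟨tv, htv⟩ : ∃ tv, t.get? x' = some tv := by
                  apply Option.isSome_iff_exists.1
                  rw [(hK x').2]; exact hx'dold
                have htv' := pvFoldM_ext_tau te x (adj.getD x []) (d, p, t, qM') x' tv hK htv
                have hgd : (((adj.getD x []).foldl (pvStepM te x) (d, p, t, qM'))).2.2.1.getD x' 0 =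
                    t.getD x' 0 := by
                  rw [PySem.Dict.getD_eq_get?_getD, htv']
                  rw [PySem.Dict.getD_eq_get?_getD, htv]
                rw [hgd]
                obtain ⟨wv, hwv⟩ : ∃ wv, t.get? w = some wv := ⟨_, hold⟩
                have := pvFoldM_ext_tau te x (adj.getD x []) (d, p, t, qM') w wv hK hwv
                rw [this, ← hwv]
                exact hold
            have hExp1 : pvExp (((adj.getD x []).foldl (pvStepM te x) (d, p, t, qM'))).1
                ((((adj.getD x []).foldl (pvStepM te x) (d, p, t, qM'))).2.2.2) (qq' ++ B) := by
              rw [h3]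
              refine pvExp_concat hExp' ?_ h4 h6
              intro k v' h
              exact pvFoldM_ext_dist te x (adj.getD x []) (d, p, t, qM') k v' h
            have hbfs : pvBfs3 adj ball pfin tw (f₃ + 1) t order (x :: qq') =
                pvBfs3 adj ball pfin tw f₃
                  (((adj.getD x []).foldl (pvStepM te x) (d, p, t, qM'))).2.2.1
                  ((adj.getD x []).foldl (pvStep3 ball pfin tw x) (t, qq', order)).2.2
                  (qq' ++ B) := by
              simp only [pvBfs3, h1, h2]
            rw [hbfs, hrun]
            refine ih fM' _ _ _ _ (qq' ++ B)
              ((adj.getD x []).foldl (pvStep3 ball pfin tw x) (t, qq', order)).2.2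
              hK1 hQ1 hP1 hX1 ?_ R4' (by rw [hballeq, hrun]) (by rw [hpfineq, hrun]) hExp1 ?_
            · have h3' : ((adj.getD x []).foldl (pvStepM te x) (d, p, t, qM')).2.2.2 = qM' ++ Mw := h3
              have h7' : ((adj.getD x []).foldl (pvStepM te x) (d, p, t, qM')).1.size =
                  d.size + Mw.length := h7
              rw [h3', h7']
              rw [List.length_cons] at hPhi
              rw [List.length_append]
              have hsz0 : d.size ≤ E + 1 := by
                have := pvSize_bound r0 flat d hX.2.2.2.1 hX.2.2.1
                omega
              rw [h7'] at hszF
              omega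
            · -- weight decreases
              have hdec := pvWt_dec ball E x B hdepx ?_ (le_trans hBlen (hadjlen x))
              · rw [pvW_append]
                rw [hWx] at hW
                omega
              · intro w hw
                have hd := hdepth w x (h5 w hw)
                have hvx : ball.getD x 0 = v := by
                  rw [PySem.Dict.getD_eq_get?_getD, hbx]; rfl
                have h0 : 0 ≤ v := (hdbound x v hbx).1
                rw [hd, hvx]
                omega

-- auxiliary counting facts about base_adj
lemma pvLen_le_flat : ∀ (L : List (Int × List Int)) (x : Int) (l : List Int),
    (x, l) ∈ L → l.length ≤ (L.flatMap (fun p => p.2)).length := by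
  intro L
  induction L with
  | nil => intro x l h; cases h
  | cons hd tl ih =>
    intro x l h
    rw [List.flatMap_cons, List.length_append]
    rcases List.mem_cons.1 h with h | h
    · have : l = hd.2 := congrArg Prod.snd h
      subst this
      omega
    · have := ih x l h
      omega

lemma pvMem_flat : ∀ (L : List (Int × List Int)) (x : Int) (l : List Int),
    (x, l) ∈ L → ∀ w ∈ l, w ∈ L.flatMap (fun p => p.2) := by
  intro L x l h w hw
  exact List.mem_flatMap.2 ⟨(x, l), h, hw⟩

lemma pvFuel_aux : ∀ (L : List (Int × List Int)) (a : Nat),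
    a + (L.flatMap (fun p => p.2)).length ≤ L.foldl (fun a p => a + 2 + p.2.length) a := by
  intro L
  induction L with
  | nil => intro a; simp
  | cons hd tl ih =>
    intro a
    rw [List.flatMap_cons, List.length_append, List.foldl_cons]
    have := ih (a + 2 + hd.2.length)
    omega

-- initial extra invariants
lemma pvXInv_init (r : Int) (flat : List Int) :
    pvXInv r flat (PySem.Dict.empty.insert r 0) (PySem.Dict.empty.insert r none)
      (PySem.Dict.empty.insert r 0) := by
  refine ⟨?_, ?_, ?_, ?_, ?_⟩
  · intro w x h
    by_cases hw : w = r
    · subst hw; rw [PySem.Dict.get?_insert_self] at h; simp at h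
    · rw [PySem.Dict.get?_insert_of_ne _ _ hw, PySem.Dict.get?_empty] at h; cases h
  · intro k v h
    by_cases hk : k = r
    · subst hk
      rw [PySem.Dict.get?_insert_self] at h
      have : v = 0 := (Option.some.inj h).symm
      subst this
      constructor
      · omega
      · norm_num [PySem.Dict.size, PySem.Dict.insert, PySem.Dict.empty]
    · rw [PySem.Dict.get?_insert_of_ne _ _ hk, PySem.Dict.get?_empty] at h; cases h
  · intro k hk
    left
    simpa [PySem.Dict.keys, PySem.Dict.insert, PySem.Dict.empty, PySem.Dict.contains] using hk
  · simp [PySem.Dict.keys, PySem.Dict.insert, PySem.Dict.empty, PySem.Dict.contains]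
  · simp [PySem.Dict.keys, PySem.Dict.insert, PySem.Dict.empty, PySem.Dict.contains]


-- initial state invariants
lemma pvInv_init (r : Int) :
    pvKEq (PySem.Dict.empty.insert r 0) (PySem.Dict.empty.insert r none) (PySem.Dict.empty.insert r 0) ∧
    pvQInv (PySem.Dict.empty.insert r 0) [r] ∧
    pvPInv (PySem.Dict.empty.insert r 0) (PySem.Dict.empty.insert r none) [r] := by
  refine ⟨?_, ⟨by simp, ?_⟩, ?_⟩
  · intro k
    by_cases hk : k = r
    · subst hk; simp [PySem.Dict.get?_insert_self]
    · simp [PySem.Dict.get?_insert_of_ne _ _ hk, PySem.Dict.get?_empty]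
  · intro k hk
    simp at hk; subst hk; simp [PySem.Dict.get?_insert_self]
  · intro w v h
    by_cases hw : w = r
    · subst hw; rw [PySem.Dict.get?_insert_self] at h; simp at h
    · rw [PySem.Dict.get?_insert_of_ne _ _ hw, PySem.Dict.get?_empty] at h; simp at h

-- every value stored by an insert-fold comes from the pair list (or was there before)
lemma pvFoldIns_get?_mem : ∀ (L : List (Int × List Int)) (d : PySem.Dict Int (List Int)) (u : Int) (l : List Int),
    (L.foldl (fun acc p => acc.insert p.1 p.2) d).get? u = some l → (u, l) ∈ L ∨ d.get? u = some l := by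
  intro L
  induction L with
  | nil => intro d u l h; exact Or.inr (by simpa using h)
  | cons hd tl ih =>
    intro d u l h
    simp only [List.foldl_cons] at h
    rcases ih _ u l h with h' | h'
    · exact Or.inl (List.mem_cons_of_mem _ h')
    · rw [PySem.Dict.get?_insert] at h'
      split at h'
      · next he =>
        subst he
        have : hd.2 = l := by injection h'
        subst this
        exact Or.inl List.mem_cons_self
      · exact Or.inr h'

-- adjacency lists retrieved from the dict of a Pre_-respecting input have no duplicates
lemma pvOfList_get?_mem (L : List (Int × List Int)) (u : Int) (l : List Int)
    (h : (PySem.Dict.ofList L).get? u = some l) : (u, l) ∈ L := by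
  have h' : (L.foldl (fun acc p => acc.insert p.1 p.2) PySem.Dict.empty).get? u = some l := h
  rcases pvFoldIns_get?_mem L PySem.Dict.empty u l h' with h'' | h''
  · exact h''
  · rw [PySem.Dict.get?_empty] at h''; cases h''

-- ===== VERDICT (by name: the statement is the Claim_ definition above) =====
theorem gauge_from_tree_spec : Claim_equal_gauge_from_tree := by
  intro base_adj twisted_edge root_u radius _ _
  unfold Spec_gauge_from_tree
  simp only [gauge_from_tree, gauge_from_tree_alt]
  obtain ⟨hK0, hQ0, hP0⟩ := pvInv_init root_u
  have hX0 := pvXInv_init root_u (base_adj.flatMap (fun p => p.2))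
  have hte : ∀ a b : Int, pvSigma twisted_edge a b =
      pvSigT (twisted_edge.map (fun t => pySort2 t.1 t.2)) a b := by
    intro a b; cases twisted_edge <;> rfl
  have hflatl : ∀ x : Int, ∀ w ∈ (PySem.Dict.ofList base_adj).getD x [],
      w ∈ base_adj.flatMap (fun p => p.2) := by
    intro x w hw
    rw [PySem.Dict.getD_eq_get?_getD] at hw
    cases h : (PySem.Dict.ofList base_adj).get? x with
    | none => rw [h] at hw; simp at hw
    | some l =>
      rw [h] at hw
      simp only [Option.getD_some] at hw
      exact pvMem_flat base_adj x l (pvOfList_get?_mem base_adj x l h) w hw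
  have hadjlen : ∀ x : Int, ((PySem.Dict.ofList base_adj).getD x []).length ≤
      (base_adj.flatMap (fun p => p.2)).length + 1 := by
    intro x
    rw [PySem.Dict.getD_eq_get?_getD]
    cases h : (PySem.Dict.ofList base_adj).get? x with
    | none => simp
    | some l =>
      have := pvLen_le_flat base_adj x l (pvOfList_get?_mem base_adj x l h)
      simp only [Option.getD_some]
      omega
  rw [pvBfs1_eq (PySem.Dict.ofList base_adj) (twisted_edge.map (fun t => pySort2 t.1 t.2)) radius
      (pvFuel base_adj) (PySem.Dict.empty.insert root_u 0) (PySem.Dict.empty.insert root_u none)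
      (PySem.Dict.empty.insert root_u 0) [root_u]]
  rw [pvBfs2_eq (PySem.Dict.ofList base_adj) (twisted_edge.map (fun t => pySort2 t.1 t.2)) radius _
      (pvFuel base_adj) (PySem.Dict.empty.insert root_u 0) (PySem.Dict.empty.insert root_u none)
      (PySem.Dict.empty.insert root_u 0) [root_u] hK0 hQ0 hP0 (fun _ _ h => h)]
  rw [pvBfsB_eq (PySem.Dict.ofList base_adj) (twisted_edge.map (fun t => pySort2 t.1 t.2)) radius
      (pvFuel base_adj) (PySem.Dict.empty.insert root_u 0) (PySem.Dict.empty.insert root_u none)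
      (PySem.Dict.empty.insert root_u 0) [root_u]]
  obtain ⟨hDVf, hVBf, hKSf, hNDf⟩ := pvMrun_xinv (PySem.Dict.ofList base_adj)
    (twisted_edge.map (fun t => pySort2 t.1 t.2)) radius root_u
    (base_adj.flatMap (fun p => p.2)) hflatl (pvFuel base_adj)
    (PySem.Dict.empty.insert root_u 0) (PySem.Dict.empty.insert root_u none)
    (PySem.Dict.empty.insert root_u 0) [root_u] hK0 hQ0 hP0 hX0
  have hszf := pvSize_bound root_u (base_adj.flatMap (fun p => p.2)) _ hNDf hKSf
  have hsz1 : (PySem.Dict.empty.insert root_u (0 : Int)).size = 1 := by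
    norm_num [PySem.Dict.size, PySem.Dict.insert, PySem.Dict.empty, PySem.Dict.contains]
  have hroot0 : (PySem.Dict.empty.insert root_u (0 : Int)).get? root_u = some 0 := by
    simp [PySem.Dict.get?_insert_self]
  have hballroot : (pvMrun (PySem.Dict.ofList base_adj)
      (twisted_edge.map (fun t => pySort2 t.1 t.2)) radius (pvFuel base_adj)
      (PySem.Dict.empty.insert root_u 0) (PySem.Dict.empty.insert root_u none)
      (PySem.Dict.empty.insert root_u 0) [root_u]).1.get? root_u = some 0 :=
    pvMrun_ext_dist _ _ _ _ _ _ _ _ _ _ hroot0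
  apply congrArg PySem.Dict.items
  refine pvBfs3_main (PySem.Dict.ofList base_adj)
    (twisted_edge.map (fun t => pySort2 t.1 t.2)) radius _ _ twisted_edge root_u
    (base_adj.flatMap (fun p => p.2)) ((base_adj.flatMap (fun p => p.2)).length)
    hte (le_refl _) hflatl hadjlen hDVf ?_ (pvFuel3 base_adj) (pvFuel base_adj)
    (PySem.Dict.empty.insert root_u 0) (PySem.Dict.empty.insert root_u none)
    (PySem.Dict.empty.insert root_u 0) [root_u] [root_u] [root_u]
    hK0 hQ0 hP0 hX0 ?_ ?_ rfl rfl (pvExp.head pvExp.nil) ?_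
  · -- value bound on the final ball
    intro k v h
    refine ⟨(hVBf k v h).1, ?_⟩
    have h1 := (hVBf k v h).2
    omega
  · -- fuel for the master run
    rw [hsz1]
    have hF : 2 + (base_adj.flatMap (fun p => p.2)).length ≤ pvFuel base_adj :=
      pvFuel_aux base_adj 2
    simp only [List.length_cons, List.length_nil]
    omega
  · -- nothing is expanded initially
    intro x hx hxq w _
    exfalso
    by_cases hxr : x = root_u
    · subst hxr; exact hxq List.mem_cons_self
    · rw [PySem.Dict.get?_insert_of_ne _ _ hxr, PySem.Dict.get?_empty] at hx
      simp at hx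
  · -- initial weight is below the third loop's fuel
    have hgd : (pvMrun (PySem.Dict.ofList base_adj)
        (twisted_edge.map (fun t => pySort2 t.1 t.2)) radius (pvFuel base_adj)
        (PySem.Dict.empty.insert root_u 0) (PySem.Dict.empty.insert root_u none)
        (PySem.Dict.empty.insert root_u 0) [root_u]).1.getD root_u 0 = 0 := by
      rw [PySem.Dict.getD_eq_get?_getD, hballroot]; rfl
    show pvW _ _ [root_u] < pvFuel3 base_adj
    have hwt : pvW (pvMrun (PySem.Dict.ofList base_adj)
        (twisted_edge.map (fun t => pySort2 t.1 t.2)) radius (pvFuel base_adj)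
        (PySem.Dict.empty.insert root_u 0) (PySem.Dict.empty.insert root_u none)
        (PySem.Dict.empty.insert root_u 0) [root_u]).1
        ((base_adj.flatMap (fun p => p.2)).length) [root_u] =
        ((base_adj.flatMap (fun p => p.2)).length + 2) ^
          ((base_adj.flatMap (fun p => p.2)).length + 1) := by
      simp only [pvW, pvWt, List.map_cons, List.map_nil, List.sum_cons, List.sum_nil, Nat.add_zero]
      rw [hgd]
      norm_num
    rw [hwt]
    unfold pvFuel3
    exact Nat.pow_lt_pow_right (by omega) (by omega)
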